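-- pv_equiv track=rewrite | github.com/reliableengineer0308/alignerr-code-verifier-scale-up | shortest-path-with-restricted-edges/solution.py | shortestPathWithRestrictedEdges
-- ===== SOURCE A (Python) =====
-- import heapq
-- from collections import defaultdict
--
-- def shortestPathWithRestrictedEdges(n, edges, restricted, start, end):
--     """
--     Finds shortest path from start to end avoiding restricted edges.
--     Time: O((V + E) log V), Space: O(V + E)
--     """
--     # Convert restricted edges to set of frozensets for O(1) lookup
--     restricted_set = set()
--     for u, v in restricted:
--         restricted_set.add(frozenset((u, v)))
--
--     # Build adjacency list (only non-restricted edges)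
--     graph = defaultdict(list)
--     for u, v, w in edges:
--         if frozenset((u, v)) not in restricted_set:
--             graph[u].append((v, w))
--             graph[v].append((u, w))  # undirected
--
--
--     # Dijkstra's algorithm
--     dist = [float('inf')] * n
--     dist[start] = 0
--     heap = [(0, start)]  # (distance, node)
--
--
--     while heap:
--         d, u = heapq.heappop(heap)
--         if d > dist[u]:
--             continue
--         if u == end:
--             break
--         for v, w in graph[u]:
--             if dist[v] > dist[u] + w:
--                 dist[v] = dist[u] + w
--                 heapq.heappush(heap, (dist[v], v))
--
--
--     return dist[end] if dist[end] != float('inf') else -1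
-- ===== SOURCE B (Python) =====
-- def shortestPathWithRestrictedEdges(n, edges, restricted, start, end):
--     """
--     Shortest path from start to end avoiding restricted edges, computed by
--     Bellman-Ford relaxation passes instead of a Dijkstra heap.  The usable
--     edges are first pruned to the connected component of start: no path can
--     leave it, so only those edges ever need relaxing.
--     """
--     banned = set()
--     for u, v in restricted:
--         banned.add((u, v) if u <= v else (v, u))
--     usable = []
--     for u, v, w in edges:
--         if ((u, v) if u <= v else (v, u)) not in banned:
--             usable.append((u, v, w))
--     comp = {start}
--     while True:
--         before = len(comp)
--         for u, v, w in usable: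
--             if u in comp or v in comp:
--                 comp.add(u)
--                 comp.add(v)
--         if len(comp) == before:
--             break
--     arcs = []
--     for u, v, w in usable:
--         if u in comp:
--             arcs.append((u, v, w))
--             arcs.append((v, u, w))
--     INF = float('inf')
--     dist = [INF] * n
--     dist[start] = 0
--     for _ in range(n - 1):
--         for u, v, w in arcs:
--             if dist[u] + w < dist[v]:
--                 dist[v] = dist[u] + w
--     return dist[end] if dist[end] != INF else -1
-- ===== Notes on version B (the rewrite author's own statement) =====
-- stated objective: alternative
-- what changed: Replaces A's lazy-deletion heapq Dijkstra (priority queue, early break at end) with plain Bellman-Ford: the usable edges are pruned to the connected component of start, then n-1 relaxation passes run over a symmetric arc list; …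
-- outside the precondition, e.g. on shortestPathWithRestrictedEdges(2, [(0, 5, 1)], [], 0, 0): A returns 0, B raises IndexError; on shortestPathWithRestrictedEdges(3, [(0, 1, 1), (0, 2, 10), (2, 1, -100)], [], 0, 1): A returns 1, B returns -290; on shortestPathWithRestrictedEdges(2, [(0, -1, 5), (1, 0, 3), (1, 0, 4)], [], -1, -2): A returns 5, B returns 3
import Mathlib
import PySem

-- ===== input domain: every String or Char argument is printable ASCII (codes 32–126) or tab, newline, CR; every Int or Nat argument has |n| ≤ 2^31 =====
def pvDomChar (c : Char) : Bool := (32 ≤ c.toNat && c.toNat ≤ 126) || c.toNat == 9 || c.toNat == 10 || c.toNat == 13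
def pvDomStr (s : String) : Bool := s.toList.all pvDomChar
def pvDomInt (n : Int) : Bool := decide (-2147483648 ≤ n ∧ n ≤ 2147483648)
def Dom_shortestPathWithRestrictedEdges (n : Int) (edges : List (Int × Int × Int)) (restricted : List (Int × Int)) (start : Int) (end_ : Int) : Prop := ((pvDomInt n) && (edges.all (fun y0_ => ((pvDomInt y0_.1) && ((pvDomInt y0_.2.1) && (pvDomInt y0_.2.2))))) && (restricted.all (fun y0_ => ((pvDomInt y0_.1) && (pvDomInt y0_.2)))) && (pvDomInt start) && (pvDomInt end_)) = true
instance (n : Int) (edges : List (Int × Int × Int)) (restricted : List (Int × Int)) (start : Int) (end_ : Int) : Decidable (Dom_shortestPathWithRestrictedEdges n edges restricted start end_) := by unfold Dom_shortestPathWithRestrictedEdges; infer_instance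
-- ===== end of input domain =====

-- B re-implements A's restricted-edge shortest path with Bellman-Ford relaxation passes
-- over a symmetric arc list instead of A's lazy-deletion Dijkstra heap; equal on all
-- instances Pre_ admits.

-- ===== PORT A =====

-- dist[i] : float('inf') is modelled as `none`.  Indexing follows Python: a negative
-- index in [-len, 0) counts from the end; exact for the indices Pre_ admits.
def pvSlot (len : Nat) (i : Int) : Nat := (if i < 0 then i + len else i).toNat
def pvDget (dist : List (Option Int)) (i : Int) : Option Int :=
  dist.getD (pvSlot dist.length i) none
def pvDset (dist : List (Option Int)) (i : Int) (x : Option Int) : List (Option Int) :=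
  dist.set (pvSlot dist.length i) x

-- frozenset((u,v)) modelled as the sorted pair (frozensets of ≤2 ints are equal iff sorted pairs are)
def pvNormPair (u v : Int) : Int × Int := if u ≤ v then (u, v) else (v, u)

def pvRestrictedSet (restricted : List (Int × Int)) : PySem.Set (Int × Int) :=
  restricted.foldl (fun s p => PySem.Set.add s (pvNormPair p.1 p.2)) PySem.Set.empty

def pvGraphA (edges : List (Int × Int × Int)) (rs : PySem.Set (Int × Int)) :
    PySem.Dict Int (List (Int × Int)) :=
  edges.foldl (fun g e =>
    if pvNormPair e.1 e.2.1 ∈ rs then g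
    else
      let g1 := g.modify e.1 [] (fun l => l ++ [(e.2.1, e.2.2)])
      g1.modify e.2.1 [] (fun l => l ++ [(e.1, e.2.2)])) PySem.Dict.empty

-- heapq on (dist, node) pairs: the popped element is always the lexicographically
-- least pair in the heap; we model the heap by its list of entries and pop the minimum.
def pvLeLex (a b : Int × Int) : Bool := a.1 < b.1 || (a.1 == b.1 && a.2 ≤ b.2)

def pvHeapMin (x : Int × Int) (xs : List (Int × Int)) : Int × Int :=
  xs.foldl (fun m y => if pvLeLex m y then m else y) x

-- the inner `for v, w in graph[u]` loop
def pvRelaxA (u : Int) (nbrs : List (Int × Int))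
    (dh : List (Option Int) × List (Int × Int)) : List (Option Int) × List (Int × Int) :=
  nbrs.foldl (fun dh vw =>
    match pvDget dh.1 u with
    | none => dh                      -- dist[v] > inf + w is false
    | some du =>
      match pvDget dh.1 vw.1 with
      | none => (pvDset dh.1 vw.1 (some (du + vw.2)), dh.2 ++ [(du + vw.2, vw.1)])
      | some dv =>
        if du + vw.2 < dv then (pvDset dh.1 vw.1 (some (du + vw.2)), dh.2 ++ [(du + vw.2, vw.1)])
        else dh) dh

-- the `while heap` loop, with fuel to make it total (the Python can loop forever on
-- negative-weight cycles, which Pre_ excludes; on Pre_ the fuel is proved sufficient)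
def pvDijkstra (graph : PySem.Dict Int (List (Int × Int))) (end_ : Int) :
    Nat → List (Option Int) → List (Int × Int) → List (Option Int)
  | 0, dist, _ => dist
  | fuel + 1, dist, heap =>
    match heap with
    | [] => dist
    | x :: xs =>
      let m := pvHeapMin x xs
      let heap' := (x :: xs).erase m
      if (match pvDget dist m.2 with | none => false | some du => decide (du < m.1)) then
        pvDijkstra graph end_ fuel dist heap'        -- d > dist[u]: continue
      else if m.2 = end_ then dist                   -- u == end: break
      else
        let dh := pvRelaxA m.2 (graph.getD m.2 []) (dist, heap')
        pvDijkstra graph end_ fuel dh.1 dh.2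

def pvMaxW (edges : List (Int × Int × Int)) : Nat :=
  edges.foldl (fun m e => max m e.2.2.toNat) 0

def pvFuelA (n : Int) (edges : List (Int × Int × Int)) : Nat :=
  n.toNat * (n.toNat * pvMaxW edges + 2) + 1

def shortestPathWithRestrictedEdges (n : Int) (edges : List (Int × Int × Int)) (restricted : List (Int × Int)) (start : Int) (end_ : Int) : Int :=
  let graph := pvGraphA edges (pvRestrictedSet restricted)
  let dist0 := pvDset (List.replicate n.toNat none) start (some 0)
  let final := pvDijkstra graph end_ (pvFuelA n edges) dist0 [(0, start)]
  match pvDget final end_ with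
  | some d => d
  | none => -1

-- ===== PORT B =====

def pvBanned (restricted : List (Int × Int)) : PySem.Set (Int × Int) :=
  restricted.foldl (fun s p => PySem.Set.add s (if p.1 ≤ p.2 then (p.1, p.2) else (p.2, p.1)))
    PySem.Set.empty

def pvUsable (edges : List (Int × Int × Int)) (banned : PySem.Set (Int × Int)) :
    List (Int × Int × Int) :=
  edges.foldl (fun a e =>
    if (if e.1 ≤ e.2.1 then (e.1, e.2.1) else (e.2.1, e.1)) ∈ banned then a
    else a ++ [e]) []

-- the body of `for u, v, w in usable: if u in comp or v in comp: comp.add(u); comp.add(v)`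
def pvCompG (R : List Int) (e : Int × Int × Int) : List Int :=
  if e.1 ∈ R ∨ e.2.1 ∈ R then PySem.Set.add (PySem.Set.add R e.1) e.2.1 else R

def pvCompStep (es : List (Int × Int × Int)) (R : List Int) : List Int :=
  es.foldl pvCompG R

-- the `while True: … if len(comp) == before: break` loop; the fuel only makes it total
-- (comp grows into a set of at most 2·|usable|+1 labels, so the fuel is never exhausted)
def pvCompLoopB (es : List (Int × Int × Int)) : Nat → List Int → List Int
  | 0, R => R
  | f + 1, R =>
    let R' := pvCompStep es R
    if R'.length = R.length then R else pvCompLoopB es f R'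

def pvArcsC (es : List (Int × Int × Int)) (comp : List Int) : List (Int × Int × Int) :=
  es.foldl (fun a e =>
    if e.1 ∈ comp then a ++ [(e.1, e.2.1, e.2.2), (e.2.1, e.1, e.2.2)] else a) []

def pvRelaxArc (dist : List (Option Int)) (arc : Int × Int × Int) : List (Option Int) :=
  match pvDget dist arc.1 with
  | none => dist
  | some du =>
    match pvDget dist arc.2.1 with
    | none => pvDset dist arc.2.1 (some (du + arc.2.2))
    | some dv => if du + arc.2.2 < dv then pvDset dist arc.2.1 (some (du + arc.2.2)) else dist

def pvBFPass (arcs : List (Int × Int × Int)) (dist : List (Option Int)) : List (Option Int) :=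
  arcs.foldl pvRelaxArc dist

-- `for _ in range(n-1)` : iterate the pass n-1 times
def pvBFLoop (arcs : List (Int × Int × Int)) : Nat → List (Option Int) → List (Option Int)
  | 0, dist => dist
  | k + 1, dist => pvBFLoop arcs k (pvBFPass arcs dist)

def shortestPathWithRestrictedEdges_alt (n : Int) (edges : List (Int × Int × Int)) (restricted : List (Int × Int)) (start : Int) (end_ : Int) : Int :=
  let usable := pvUsable edges (pvBanned restricted)
  let comp := pvCompLoopB usable (2 * usable.length + 2) [start]
  let arcs := pvArcsC usable comp
  let dist0 := pvDset (List.replicate n.toNat none) start (some 0)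
  let final := pvBFLoop arcs (n - 1).toNat dist0
  match pvDget final end_ with
  | some d => d
  | none => -1

-- ===== PRECONDITION & SPEC =====
-- Helpers for Pre_: the non-restricted edges, the connected component of `start` among
-- them (a shape property of the input graph: which nodes the search can ever touch),
-- and the node labels the two programs index the dist array with.
def pvNRes (edges : List (Int × Int × Int)) (restricted : List (Int × Int)) :
    List (Int × Int × Int) :=
  edges.filter (fun e => decide (pvNormPair e.1 e.2.1 ∉ pvRestrictedSet restricted))

def pvCompIter (es : List (Int × Int × Int)) : Nat → List Int → List Int
  | 0, R => R
  | k + 1, R => pvCompIter es k (pvCompStep es R)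

def pvComp (edges : List (Int × Int × Int)) (restricted : List (Int × Int)) (start : Int) :
    List Int :=
  pvCompIter (pvNRes edges restricted) (2 * (pvNRes edges restricted).length + 1) [start]

-- the non-restricted edges touching the connected component of start: the only edges
-- whose endpoints either program's answer can depend on
def pvCompEdges (edges : List (Int × Int × Int)) (restricted : List (Int × Int))
    (start : Int) : List (Int × Int × Int) :=
  (pvNRes edges restricted).filter (fun e =>
    decide (e.1 ∈ pvComp edges restricted start ∨ e.2.1 ∈ pvComp edges restricted start))

def pvLabels (edges : List (Int × Int × Int)) (restricted : List (Int × Int))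
    (start end_ : Int) : List Int :=
  start :: end_ :: (pvCompEdges edges restricted start).flatMap (fun e => [e.1, e.2.1])

-- Pre_ = the instances on which A's value is the shortest-path answer being claimed:
-- a positive node count, start/end valid indices, every non-restricted edge touching the
-- connected component of start well-formed (valid indices, nonnegative weight — A's
-- Dijkstra raises IndexError, loops forever or returns a non-shortest value otherwise),
-- and no two distinct usable labels naming the same dist slot via Python's negative
-- indexing (there A mixes its label-keyed adjacency dict with the slot-indexed dist
-- array, B keys everything by label, and either reading is defensible).
def Pre_shortestPathWithRestrictedEdges (n : Int) (edges : List (Int × Int × Int)) (restricted : List (Int × Int)) (start : Int) (end_ : Int) : Prop :=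
  1 ≤ n ∧ -n ≤ start ∧ start < n ∧ -n ≤ end_ ∧ end_ < n ∧
  (∀ e ∈ pvCompEdges edges restricted start,
    -n ≤ e.1 ∧ e.1 < n ∧ -n ≤ e.2.1 ∧ e.2.1 < n ∧ 0 ≤ e.2.2) ∧
  (∀ x ∈ pvLabels edges restricted start end_, ∀ y ∈ pvLabels edges restricted start end_,
    pvSlot n.toNat x = pvSlot n.toNat y → x = y)
instance (n : Int) (edges : List (Int × Int × Int)) (restricted : List (Int × Int)) (start : Int) (end_ : Int) : Decidable (Pre_shortestPathWithRestrictedEdges n edges restricted start end_) := by unfold Pre_shortestPathWithRestrictedEdges; infer_instance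

def pvWitness_shortestPathWithRestrictedEdges : Int × (List (Int × Int × Int)) × (List (Int × Int)) × Int × Int :=
  (3, [(0, 1, 2), (1, 2, 3), (0, 2, 1)], [(0, 2)], 0, 2)

def Spec_shortestPathWithRestrictedEdges (n : Int) (edges : List (Int × Int × Int)) (restricted : List (Int × Int)) (start : Int) (end_ : Int) (out : Int) : Prop := out = shortestPathWithRestrictedEdges_alt n edges restricted start end_
instance (n : Int) (edges : List (Int × Int × Int)) (restricted : List (Int × Int)) (start : Int) (end_ : Int) (out : Int) : Decidable (Spec_shortestPathWithRestrictedEdges n edges restricted start end_ out) := by unfold Spec_shortestPathWithRestrictedEdges; infer_instance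

-- ===== CLAIM (what is proved, stated in full; the proofs are below) =====
def Claim_equal_shortestPathWithRestrictedEdges : Prop := ∀ (n : Int) (edges : List (Int × Int × Int)) (restricted : List (Int × Int)) (start : Int) (end_ : Int), Dom_shortestPathWithRestrictedEdges n edges restricted start end_ → Pre_shortestPathWithRestrictedEdges n edges restricted start end_ → Spec_shortestPathWithRestrictedEdges n edges restricted start end_ (shortestPathWithRestrictedEdges n edges restricted start end_)

-- ===== LEMMAS AND PROOFS =====

-- ---------- generic helpers ----------

theorem pvSum_map_set {α : Type} (f : α → Nat) :
    ∀ (l : List α) (k : Nat) (x : α), k < l.length →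
      ((l.set k x).map f).sum + f (l.getD k x) = (l.map f).sum + f x := by
  intro l
  induction l with
  | nil => intro k x h; simp at h
  | cons a t ih =>
    intro k x h
    cases k with
    | zero => simp [List.set]; omega
    | succ k =>
      simp only [List.set, List.map, List.sum_cons, List.getD, List.getElem?_cons_succ]
      have := ih k x (by simpa using h)
      simp only [List.getD] at this
      omega

theorem pvDup_split {α : Type} [DecidableEq α] :
    ∀ (l : List α), ¬ l.Nodup → ∃ x l1 l2 l3, l = l1 ++ x :: (l2 ++ x :: l3) := by
  intro l
  induction l with
  | nil => intro h; exact absurd List.nodup_nil h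
  | cons a t ih =>
    intro h
    by_cases ha : a ∈ t
    · obtain ⟨t1, t2, rfl⟩ := List.append_of_mem ha
      exact ⟨a, [], t1, t2, rfl⟩
    · have : ¬ t.Nodup := fun hn => h (List.nodup_cons.mpr ⟨ha, hn⟩)
      obtain ⟨x, l1, l2, l3, rfl⟩ := ih this
      exact ⟨x, a :: l1, l2, l3, rfl⟩

theorem pvNodupNat_length_le (l : List Nat) (k : Nat) (hnd : l.Nodup)
    (hb : ∀ x ∈ l, x < k) : l.length ≤ k := by
  have hsub : l.toFinset ⊆ Finset.range k := by
    intro m hm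
    simp only [List.mem_toFinset] at hm
    simp only [Finset.mem_range]
    exact hb m hm
  have := Finset.card_le_card hsub
  rw [List.toFinset_card_of_nodup hnd] at this
  simpa using this

theorem pvNodup_subset_length {α : Type} [DecidableEq α] (l S : List α) (h : l.Nodup)
    (hs : ∀ x ∈ l, x ∈ S) : l.length ≤ S.length := by
  have h1 : l.toFinset ⊆ S.toFinset := by
    intro a ha
    simp only [List.mem_toFinset] at *
    exact hs a ha
  have h2 := Finset.card_le_card h1
  rw [List.toFinset_card_of_nodup h] at h2
  exact le_trans h2 (List.toFinset_card_le S)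

-- ---------- Option Int as {Int} ∪ {∞}: order ----------

def pvOLE : Option Int → Option Int → Prop
  | _, none => True
  | none, some _ => False
  | some a, some b => a ≤ b

theorem pvOLE_refl (a : Option Int) : pvOLE a a := by cases a <;> simp [pvOLE]

theorem pvOLE_trans {a b c : Option Int} (h1 : pvOLE a b) (h2 : pvOLE b c) : pvOLE a c := by
  cases a <;> cases b <;> cases c <;> simp_all [pvOLE]; omega

theorem pvOLE_some_iff {a : Option Int} {v : Int} :
    pvOLE a (some v) ↔ ∃ u, a = some u ∧ u ≤ v := by
  cases a <;> simp [pvOLE]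

-- ---------- dist array access through Python index slots ----------

theorem pvSlot_lt {len : Nat} {i : Int} (h1 : -(len : Int) ≤ i) (h2 : i < len) :
    pvSlot len i < len := by
  unfold pvSlot
  split <;> omega

theorem pvDset_length (dist : List (Option Int)) (i : Int) (x : Option Int) :
    (pvDset dist i x).length = dist.length := by simp [pvDset]

theorem pvDget_set_self {dist : List (Option Int)} {i : Int} (x : Option Int)
    (h : pvSlot dist.length i < dist.length) : pvDget (pvDset dist i x) i = x := by
  simp only [pvDget, pvDset, List.length_set]
  simp [List.getD, List.getElem?_set_self h]

theorem pvDget_set_ne {dist : List (Option Int)} {i j : Int} (x : Option Int)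
    (hij : pvSlot dist.length i ≠ pvSlot dist.length j) :
    pvDget (pvDset dist i x) j = pvDget dist j := by
  simp only [pvDget, pvDset, List.length_set]
  simp [List.getD, List.getElem?_set_ne hij]

theorem pvDget_eq_getElem {dist : List (Option Int)} {i : Int}
    (h : pvSlot dist.length i < dist.length) : pvDget dist i = dist[pvSlot dist.length i] := by
  simp [pvDget, List.getD, List.getElem?_eq_getElem h]

-- ---------- walks in the effective (symmetrised, non-restricted) arc list ----------

def pvLinked (arcs : List (Int × Int × Int)) : Int → List (Int × Int × Int) → Int → Prop
  | a, [], b => b = a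
  | a, s :: ss, b => s ∈ arcs ∧ s.1 = a ∧ pvLinked arcs s.2.1 ss b

def pvCost (ss : List (Int × Int × Int)) : Int := (ss.map (fun s => s.2.2)).sum

theorem pvCost_nil : pvCost [] = 0 := rfl

theorem pvCost_append (p q : List (Int × Int × Int)) : pvCost (p ++ q) = pvCost p + pvCost q := by
  simp [pvCost]

theorem pvLinked_append {arcs : List (Int × Int × Int)} :
    ∀ {p q : List (Int × Int × Int)} {a c : Int},
      pvLinked arcs a (p ++ q) c ↔ ∃ b, pvLinked arcs a p b ∧ pvLinked arcs b q c := by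
  intro p
  induction p with
  | nil =>
    intro q a c
    constructor
    · intro h; exact ⟨a, rfl, h⟩
    · rintro ⟨b, hb, h⟩; cases hb; exact h
  | cons s t ih =>
    intro q a c
    simp only [List.cons_append, pvLinked]
    constructor
    · rintro ⟨hm, h1, h2⟩
      obtain ⟨b, hb1, hb2⟩ := ih.mp h2
      exact ⟨b, ⟨hm, h1, hb1⟩, hb2⟩
    · rintro ⟨b, ⟨hm, h1, hb1⟩, hb2⟩
      exact ⟨hm, h1, ih.mpr ⟨b, hb1, hb2⟩⟩

theorem pvLinked_steps_mem {arcs : List (Int × Int × Int)} :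
    ∀ {ss : List (Int × Int × Int)} {a b : Int}, pvLinked arcs a ss b → ∀ s ∈ ss, s ∈ arcs := by
  intro ss
  induction ss with
  | nil => intro a b _ s hs; simp at hs
  | cons x t ih =>
    intro a b h s hs
    obtain ⟨hm, _, h2⟩ := h
    rcases List.mem_cons.mp hs with rfl | hs
    · exact hm
    · exact ih h2 s hs

theorem pvLinked_last {arcs : List (Int × Int × Int)} {p : List (Int × Int × Int)}
    {s : Int × Int × Int} {a b : Int} (h : pvLinked arcs a (p ++ [s]) b) : b = s.2.1 := by
  obtain ⟨m, _, hm2⟩ := pvLinked_append.mp h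
  obtain ⟨_, _, h3⟩ := hm2
  exact h3

-- the static context the proofs run in: L = the labels either program may index dist with
-- (all valid Python indices, no two naming the same slot), R = the connected component of
-- start (arc targets of R-sources stay in R, weights of R-sourced arcs are nonnegative)
def pvCtx (n start : Int) (arcs : List (Int × Int × Int)) (L R : List Int) : Prop :=
  (∀ x ∈ L, -n ≤ x ∧ x < n) ∧
  (∀ x ∈ L, ∀ y ∈ L, pvSlot n.toNat x = pvSlot n.toNat y → x = y) ∧
  start ∈ L ∧ start ∈ R ∧
  (∀ x ∈ R, x ∈ L) ∧
  (∀ s ∈ arcs, s.1 ∈ R → s.2.1 ∈ R) ∧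
  (∀ s ∈ arcs, s.1 ∈ R → 0 ≤ s.2.2)

theorem pvCtx_n1 {n start : Int} {arcs : List (Int × Int × Int)} {L R : List Int}
    (hc : pvCtx n start arcs L R) : 1 ≤ n := by
  have := hc.1 start hc.2.2.1
  omega

theorem pvCtx_slot_ne {n start : Int} {arcs : List (Int × Int × Int)} {L R : List Int}
    (hc : pvCtx n start arcs L R) {x y : Int} (hx : x ∈ L) (hy : y ∈ L) (hne : x ≠ y) :
    pvSlot n.toNat x ≠ pvSlot n.toNat y :=
  fun h => hne (hc.2.1 x hx y hy h)

theorem pvCtx_slot_lt {n start : Int} {arcs : List (Int × Int × Int)} {L R : List Int}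
    (hc : pvCtx n start arcs L R) {x : Int} (hx : x ∈ L) : pvSlot n.toNat x < n.toNat := by
  have hb := hc.1 x hx
  have hn := pvCtx_n1 hc
  exact pvSlot_lt (by omega) (by omega)

theorem pvWalk_R {n start : Int} {arcs : List (Int × Int × Int)} {L R : List Int}
    (hc : pvCtx n start arcs L R) :
    ∀ {ss : List (Int × Int × Int)} {a b : Int}, a ∈ R → pvLinked arcs a ss b →
      b ∈ R ∧ ∀ s ∈ ss, s.1 ∈ R := by
  intro ss
  induction ss with
  | nil => intro a b ha h; cases h; exact ⟨ha, by simp⟩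
  | cons x t ih =>
    intro a b ha h
    obtain ⟨hm, hx1, h2⟩ := h
    have hx2R : x.2.1 ∈ R := hc.2.2.2.2.2.1 x hm (by rw [hx1]; exact ha)
    obtain ⟨hbR, hsteps⟩ := ih hx2R h2
    refine ⟨hbR, ?_⟩
    intro s hs
    rcases List.mem_cons.mp hs with rfl | hs
    · rw [hx1]; exact ha
    · exact hsteps s hs

theorem pvCost_nonneg {n start : Int} {arcs : List (Int × Int × Int)} {L R : List Int}
    (hc : pvCtx n start arcs L R) {ss : List (Int × Int × Int)} {a b : Int}
    (ha : a ∈ R) (h : pvLinked arcs a ss b) : 0 ≤ pvCost ss := by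
  have hsteps := (pvWalk_R hc ha h).2
  have hmem := pvLinked_steps_mem h
  clear h
  induction ss with
  | nil => simp [pvCost]
  | cons x t ih =>
    have hw := hc.2.2.2.2.2.2 x (hmem x (by simp)) (hsteps x (by simp))
    have := ih (fun s hs => hsteps s (by simp [hs])) (fun s hs => hmem s (by simp [hs]))
    simp only [pvCost, List.map, List.sum_cons] at *
    omega

-- the shortest-path specification: o is the least walk cost from start to z (none if unreachable)
def pvIsSP (arcs : List (Int × Int × Int)) (start z : Int) (o : Option Int) : Prop :=
  (∀ val, o = some val → ∃ ss, pvLinked arcs start ss z ∧ pvCost ss = val) ∧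
  (∀ ss, pvLinked arcs start ss z → ∃ val, o = some val ∧ val ≤ pvCost ss)

theorem pvIsSP_unique {arcs : List (Int × Int × Int)} {start z : Int} {o1 o2 : Option Int}
    (h1 : pvIsSP arcs start z o1) (h2 : pvIsSP arcs start z o2) : o1 = o2 := by
  cases ho1 : o1 with
  | none =>
    cases ho2 : o2 with
    | none => rfl
    | some v =>
      obtain ⟨ss, hss, _⟩ := h2.1 v ho2
      obtain ⟨val, hval, _⟩ := h1.2 ss hss
      rw [ho1] at hval; cases hval
  | some v =>
    obtain ⟨ss, hss, hc⟩ := h1.1 v ho1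
    obtain ⟨val2, hval2, hle2⟩ := h2.2 ss hss
    cases ho2 : o2 with
    | none => rw [ho2] at hval2; cases hval2
    | some w =>
      rw [ho2] at hval2
      obtain ⟨ss2, hss2, hc2⟩ := h2.1 w ho2
      obtain ⟨val1, hval1, hle1⟩ := h1.2 ss2 hss2
      rw [ho1] at hval1
      have hv : v = val1 := by injection hval1
      have hw : w = val2 := by injection hval2
      have : v = w := by omega
      rw [this]

-- cycle cutting: any walk can be shortened to one with at most n-1 steps and no larger cost
theorem pvCut {n start : Int} {arcs : List (Int × Int × Int)} {L R : List Int}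
    (hc : pvCtx n start arcs L R) :
    ∀ (Lb : Nat) (ss : List (Int × Int × Int)) (z : Int), ss.length ≤ Lb →
      pvLinked arcs start ss z →
      ∃ ss', pvLinked arcs start ss' z ∧ pvCost ss' ≤ pvCost ss ∧ ss'.length + 1 ≤ n.toNat := by
  intro Lb
  induction Lb with
  | zero =>
    intro ss z hl h
    have : ss = [] := List.length_eq_zero_iff.mp (by omega)
    subst this
    refine ⟨[], h, le_refl _, ?_⟩
    have := pvCtx_n1 hc
    simp only [List.length_nil]
    omega
  | succ Lb ih =>
    intro ss z hl h
    by_cases hfit : ss.length + 1 ≤ n.toNat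
    · exact ⟨ss, h, le_refl _, hfit⟩
    · -- the node list start :: targets has > n entries whose slots lie in [0,n): a repeat
      set N : List Int := start :: ss.map (fun s => s.2.1) with hN
      have hNlen : N.length = ss.length + 1 := by simp [hN]
      have hNL : ∀ x ∈ N, x ∈ L := by
        intro x hx
        rcases List.mem_cons.mp hx with rfl | hx
        · exact hc.2.2.1
        · obtain ⟨s, hs, rfl⟩ := List.mem_map.mp hx
          exact hc.2.2.2.2.1 _ (hc.2.2.2.2.2.1 s (pvLinked_steps_mem h s hs)
            ((pvWalk_R hc hc.2.2.2.1 h).2 s hs))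
      have hnd : ¬ N.Nodup := by
        intro hnd
        have hmapnd : (N.map (pvSlot n.toNat)).Nodup := by
          refine (List.nodup_map_iff_inj_on hnd).mpr ?_
          intro x hx y hy hxy
          exact hc.2.1 x (hNL x hx) y (hNL y hy) hxy
        have := pvNodupNat_length_le (N.map (pvSlot n.toNat)) n.toNat hmapnd (by
          intro x hx
          obtain ⟨y, hy, rfl⟩ := List.mem_map.mp hx
          exact pvCtx_slot_lt hc (hNL y hy))
        simp only [List.length_map] at this
        omega
      obtain ⟨x, l1, l2, l3, hsplit⟩ := pvDup_split N hnd
      -- split the step list according to where the repeated node occurs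
      rcases l1 with _ | ⟨a, l1'⟩
      · -- the repeat is the start node: drop the initial closed loop
        have hx : x = start := by
          have : N.head? = some start := by simp [hN]
          rw [hsplit] at this; simp at this; omega
        subst hx
        have hmap : ss.map (fun s => s.2.1) = (l2 ++ [x]) ++ l3 := by
          have : N.tail = l2 ++ x :: l3 := by rw [hsplit]; simp
          have h2 : N.tail = ss.map (fun s => s.2.1) := by simp [hN]
          rw [h2] at this; rw [this]; simp
        obtain ⟨s1, s2, rfl, hm1, hm2⟩ := List.append_eq_map_iff.mp hmap.symm
        have hs1ne : s1 ≠ [] := by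
          intro hnil; rw [hnil] at hm1; simp at hm1
        obtain ⟨b, hb1, hb2⟩ := pvLinked_append.mp h
        have hbx : b = x := by
          rcases List.eq_nil_or_concat s1 with rfl | ⟨p, s, rfl⟩
          · exact absurd rfl hs1ne
          · have := pvLinked_last (arcs := arcs) (by simpa using hb1)
            have hlast : s.2.1 = x := by
              rw [List.concat_eq_append, List.map_append] at hm1
              simp at hm1
              exact hm1.2
            omega
        subst hbx
        have hcost1 : 0 ≤ pvCost s1 := pvCost_nonneg hc hc.2.2.2.1 hb1
        have hlen2 : s2.length ≤ Lb := by
          have hpos : 1 ≤ s1.length := by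
            rcases s1 with _ | _
            · exact absurd rfl hs1ne
            · simp
          simp only [List.length_append] at hl
          omega
        obtain ⟨ss', h1', h2', h3'⟩ := ih s2 z hlen2 hb2
        refine ⟨ss', h1', ?_, h3'⟩
        rw [pvCost_append]
        omega
      · -- the repeat is an interior node: excise the closed loop between its two visits
        have hmap : ss.map (fun s => s.2.1) = (l1' ++ [x]) ++ ((l2 ++ [x]) ++ l3) := by
          have : N.tail = l1' ++ x :: l2 ++ x :: l3 := by rw [hsplit]; simp
          have h2 : N.tail = ss.map (fun s => s.2.1) := by simp [hN]
          rw [h2] at this; rw [this]; simp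
        obtain ⟨s1, s23, rfl, hm1, hm23⟩ := List.append_eq_map_iff.mp hmap.symm
        obtain ⟨s2, s3, rfl, hm2, hm3⟩ := List.append_eq_map_iff.mp hm23.symm
        obtain ⟨b1, hb1, hb23⟩ := pvLinked_append.mp h
        obtain ⟨b2, hb2, hb3⟩ := pvLinked_append.mp hb23
        have hlastlem : ∀ (t : List (Int × Int × Int)) (A : List Int) (a c : Int),
            pvLinked arcs a t c → t.map (fun s => s.2.1) = A ++ [x] → c = x := by
          intro t A a c hlk hmt
          rcases List.eq_nil_or_concat t with rfl | ⟨p, s, rfl⟩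
          · simp at hmt
          · have := pvLinked_last (arcs := arcs) (by simpa using hlk)
            rw [List.concat_eq_append, List.map_append] at hmt
            simp at hmt
            omega
        have hb1x : b1 = x := hlastlem s1 l1' start b1 hb1 hm1
        have hb2x : b2 = x := hlastlem s2 l2 b1 b2 hb2 hm2
        have hb21 : b2 = b1 := by omega
        have hlink' : pvLinked arcs start (s1 ++ s3) z :=
          pvLinked_append.mpr ⟨b1, hb1, hb21 ▸ hb3⟩
        have hb1R : b1 ∈ R := (pvWalk_R hc hc.2.2.2.1 hb1).1
        have hcost2 : 0 ≤ pvCost s2 := pvCost_nonneg hc hb1R hb2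
        have hs2ne : 1 ≤ s2.length := by
          rcases s2 with _ | _
          · simp at hm2
          · simp
        have hlen : (s1 ++ s3).length ≤ Lb := by
          simp only [List.length_append] at hl ⊢
          omega
        obtain ⟨ss', h1', h2', h3'⟩ := ih (s1 ++ s3) z hlen hlink'
        refine ⟨ss', h1', ?_, h3'⟩
        rw [pvCost_append] at h2'
        rw [pvCost_append, pvCost_append]
        omega

-- ---------- Bellman-Ford relaxation analysis ----------

def pvOAdd : Option Int → Int → Option Int
  | none, _ => none
  | some a, w => some (a + w)

theorem pvOLE_oAdd {a b : Option Int} (w : Int) (h : pvOLE a b) : pvOLE (pvOAdd a w) (pvOAdd b w) := by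
  cases a <;> cases b <;> simp_all [pvOLE, pvOAdd] <;> omega

-- invariants on a dist array: length, dist[start] = 0, every finite entry is a walk cost
def pvBInv (arcs : List (Int × Int × Int)) (n start : Int) (L : List Int)
    (dist : List (Option Int)) : Prop :=
  dist.length = n.toNat ∧ pvDget dist start = some 0 ∧
  (∀ i ∈ L, ∀ val, pvDget dist i = some val →
    ∃ ss, pvLinked arcs start ss i ∧ pvCost ss = val)

theorem pvBInv_nonneg {n start : Int} {arcs : List (Int × Int × Int)} {L R : List Int}
    {dist : List (Option Int)} (hc : pvCtx n start arcs L R)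
    (h : pvBInv arcs n start L dist) :
    ∀ i ∈ L, ∀ val, pvDget dist i = some val → 0 ≤ val := by
  intro i hi val hv
  obtain ⟨ss, hss, hcst⟩ := h.2.2 i hi val hv
  have := pvCost_nonneg hc hc.2.2.2.1 hss
  omega

theorem pvBInv_finite_R {n start : Int} {arcs : List (Int × Int × Int)} {L R : List Int}
    {dist : List (Option Int)} (hc : pvCtx n start arcs L R)
    (h : pvBInv arcs n start L dist) :
    ∀ i ∈ L, ∀ val, pvDget dist i = some val → i ∈ R := by
  intro i hi val hv
  obtain ⟨ss, hss, _⟩ := h.2.2 i hi val hv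
  exact (pvWalk_R hc hc.2.2.2.1 hss).1

theorem pvRelaxArc_length (dist : List (Option Int)) (arc : Int × Int × Int) :
    (pvRelaxArc dist arc).length = dist.length := by
  unfold pvRelaxArc
  cases pvDget dist arc.1 <;> try rfl
  cases pvDget dist arc.2.1 <;> simp [pvDset_length]
  split <;> simp [pvDset_length]

theorem pvRelaxArc_mono {n start : Int} {arcs : List (Int × Int × Int)} {L R : List Int}
    {dist : List (Option Int)} {arc : Int × Int × Int}
    (hc : pvCtx n start arcs L R) (hlen : dist.length = n.toNat) (hvL : arc.2.1 ∈ L) :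
    ∀ i ∈ L, pvOLE (pvDget (pvRelaxArc dist arc) i) (pvDget dist i) := by
  intro i hi
  have hrange : pvSlot dist.length arc.2.1 < dist.length := by
    rw [hlen]; exact pvCtx_slot_lt hc hvL
  rcases hu : pvDget dist arc.1 with _ | du
  · simp only [pvRelaxArc, hu]; exact pvOLE_refl _
  · rcases hv : pvDget dist arc.2.1 with _ | dv
    · simp only [pvRelaxArc, hu, hv]
      by_cases hiv : i = arc.2.1
      · rw [hiv, pvDget_set_self _ hrange, hv]; simp [pvOLE]
      · rw [pvDget_set_ne _ (by rw [hlen]; exact pvCtx_slot_ne hc hvL hi (fun hh => hiv hh.symm))]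
        exact pvOLE_refl _
    · simp only [pvRelaxArc, hu, hv]
      by_cases hlt : du + arc.2.2 < dv
      · simp only [if_pos hlt]
        by_cases hiv : i = arc.2.1
        · rw [hiv, pvDget_set_self _ hrange, hv]; simp [pvOLE]; omega
        · rw [pvDget_set_ne _ (by rw [hlen]; exact pvCtx_slot_ne hc hvL hi (fun hh => hiv hh.symm))]
          exact pvOLE_refl _
      · simp only [if_neg hlt]; exact pvOLE_refl _

theorem pvRelaxArc_BInv {n start : Int} {arcs : List (Int × Int × Int)} {L R : List Int}
    {dist : List (Option Int)} {arc : Int × Int × Int}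
    (hc : pvCtx n start arcs L R) (hmem : arc ∈ arcs) (huL : arc.1 ∈ L) (hvL : arc.2.1 ∈ L)
    (h : pvBInv arcs n start L dist) :
    pvBInv arcs n start L (pvRelaxArc dist arc) := by
  obtain ⟨hlen, hst, hach⟩ := h
  have hvr : pvSlot dist.length arc.2.1 < dist.length := by
    rw [hlen]; exact pvCtx_slot_lt hc hvL
  refine ⟨by rw [pvRelaxArc_length]; exact hlen, ?_, ?_⟩
  · -- dist[start] stays 0 : any assigned value is a walk cost plus a nonneg weight, so ≥ 0
    rcases hu : pvDget dist arc.1 with _ | du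
    · simp only [pvRelaxArc, hu]; exact hst
    · have hdu0 : 0 ≤ du := pvBInv_nonneg hc ⟨hlen, hst, hach⟩ arc.1 huL du hu
      have huR : arc.1 ∈ R := pvBInv_finite_R hc ⟨hlen, hst, hach⟩ arc.1 huL du hu
      have hw0 : 0 ≤ arc.2.2 := hc.2.2.2.2.2.2 arc hmem huR
      rcases hv : pvDget dist arc.2.1 with _ | dv
      · simp only [pvRelaxArc, hu, hv]
        by_cases hse : start = arc.2.1
        · rw [← hse] at hv; rw [hst] at hv; cases hv
        · rw [pvDget_set_ne _ (by rw [hlen]; exact pvCtx_slot_ne hc hvL hc.2.2.1 (fun hh => hse hh.symm))]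
          exact hst
      · simp only [pvRelaxArc, hu, hv]
        by_cases hlt : du + arc.2.2 < dv
        · simp only [if_pos hlt]
          by_cases hse : start = arc.2.1
          · rw [← hse] at hv; rw [hst] at hv
            injection hv with hv
            omega
          · rw [pvDget_set_ne _ (by rw [hlen]; exact pvCtx_slot_ne hc hvL hc.2.2.1 (fun hh => hse hh.symm))]
            exact hst
        · simp only [if_neg hlt]; exact hst
  · intro i hi val hv
    rcases hu : pvDget dist arc.1 with _ | du
    · simp only [pvRelaxArc, hu] at hv; exact hach i hi val hv
    · obtain ⟨ssu, hssu, hcu⟩ := hach arc.1 huL du hu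
      have hnew : ∀ (hveq : i = arc.2.1) (hval : val = du + arc.2.2),
          ∃ ss, pvLinked arcs start ss i ∧ pvCost ss = val := by
        intro hveq hval
        refine ⟨ssu ++ [arc], ?_, ?_⟩
        · exact pvLinked_append.mpr ⟨arc.1, hssu, ⟨hmem, rfl, hveq⟩⟩
        · rw [pvCost_append, hcu, hval]; simp [pvCost]
      have hassign : pvDget (pvDset dist arc.2.1 (some (du + arc.2.2))) i = some val →
          ∃ ss, pvLinked arcs start ss i ∧ pvCost ss = val := by
        intro hv'
        by_cases hie : i = arc.2.1
        · rw [hie, pvDget_set_self _ hvr] at hv'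
          injection hv' with hv'
          exact hnew hie hv'.symm
        · rw [pvDget_set_ne _ (by rw [hlen]; exact pvCtx_slot_ne hc hvL hi (fun hh => hie hh.symm))] at hv'
          exact hach i hi val hv'
      rcases hv2 : pvDget dist arc.2.1 with _ | dv
      · simp only [pvRelaxArc, hu, hv2] at hv; exact hassign hv
      · simp only [pvRelaxArc, hu, hv2] at hv
        by_cases hlt : du + arc.2.2 < dv
        · rw [if_pos hlt] at hv; exact hassign hv
        · rw [if_neg hlt] at hv; exact hach i hi val hv

theorem pvRelaxArc_bound {n start : Int} {arcs : List (Int × Int × Int)} {L R : List Int}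
    {dist : List (Option Int)} {arc : Int × Int × Int}
    (hc : pvCtx n start arcs L R) (hlen : dist.length = n.toNat) (hvL : arc.2.1 ∈ L) :
    pvOLE (pvDget (pvRelaxArc dist arc) arc.2.1) (pvOAdd (pvDget dist arc.1) arc.2.2) := by
  have hvr : pvSlot dist.length arc.2.1 < dist.length := by
    rw [hlen]; exact pvCtx_slot_lt hc hvL
  rcases hu : pvDget dist arc.1 with _ | du
  · simp [pvRelaxArc, hu, pvOAdd, pvOLE]
  · rcases hv : pvDget dist arc.2.1 with _ | dv
    · simp only [pvRelaxArc, hu, hv, pvOAdd]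
      rw [pvDget_set_self _ hvr]; simp [pvOLE]
    · simp only [pvRelaxArc, hu, hv, pvOAdd]
      by_cases hlt : du + arc.2.2 < dv
      · rw [if_pos hlt, pvDget_set_self _ hvr]; simp [pvOLE]
      · rw [if_neg hlt, hv]; simp only [pvOLE]; omega

theorem pvFold_length :
    ∀ (l : List (Int × Int × Int)) (dist : List (Option Int)),
      (l.foldl pvRelaxArc dist).length = dist.length := by
  intro l
  induction l with
  | nil => intro dist; rfl
  | cons a t ih => intro dist; rw [List.foldl_cons, ih, pvRelaxArc_length]

theorem pvFold_mono {n start : Int} {arcs : List (Int × Int × Int)} {L R : List Int}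
    (hc : pvCtx n start arcs L R) :
    ∀ (l : List (Int × Int × Int)) (dist : List (Option Int)),
      dist.length = n.toNat → (∀ s ∈ l, s.2.1 ∈ L) →
      ∀ i ∈ L, pvOLE (pvDget (l.foldl pvRelaxArc dist) i) (pvDget dist i) := by
  intro l
  induction l with
  | nil => intro dist _ _ i _; exact pvOLE_refl _
  | cons a t ih =>
    intro dist hlen hb i hi
    rw [List.foldl_cons]
    have h1 := pvRelaxArc_mono hc hlen (hb a (by simp)) i hi
    have h2 := ih (pvRelaxArc dist a) (by rw [pvRelaxArc_length]; exact hlen)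
      (fun s hs => hb s (by simp [hs])) i hi
    exact pvOLE_trans h2 h1

theorem pvBFPass_relaxes {n start : Int} {arcs : List (Int × Int × Int)} {L R : List Int}
    (hc : pvCtx n start arcs L R) (hepts : ∀ s ∈ arcs, s.1 ∈ L ∧ s.2.1 ∈ L) :
    ∀ {dist : List (Option Int)}, dist.length = n.toNat → ∀ arc ∈ arcs,
      pvOLE (pvDget (pvBFPass arcs dist) arc.2.1) (pvOAdd (pvDget dist arc.1) arc.2.2) := by
  intro dist hlen arc hmem
  have hal : arc.1 ∈ L := (hepts arc hmem).1
  have hvL : arc.2.1 ∈ L := (hepts arc hmem).2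
  obtain ⟨p, q, rfl⟩ := List.append_of_mem hmem
  unfold pvBFPass
  rw [List.foldl_append, List.foldl_cons]
  have hlp : (p.foldl pvRelaxArc dist).length = n.toNat := by
    rw [pvFold_length]; exact hlen
  have hmono_p : ∀ i ∈ L, pvOLE (pvDget (p.foldl pvRelaxArc dist) i) (pvDget dist i) :=
    pvFold_mono hc p dist hlen (fun s hs => (hepts s (by simp [hs])).2)
  have hb := pvRelaxArc_bound (dist := p.foldl pvRelaxArc dist) (arc := arc) hc hlp hvL
  have hmono_q : ∀ i ∈ L,
      pvOLE (pvDget (q.foldl pvRelaxArc (pvRelaxArc (p.foldl pvRelaxArc dist) arc)) i)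
        (pvDget (pvRelaxArc (p.foldl pvRelaxArc dist) arc) i) :=
    pvFold_mono hc q _ (by rw [pvRelaxArc_length]; exact hlp)
      (fun s hs => (hepts s (by simp [hs])).2)
  refine pvOLE_trans (pvOLE_trans (hmono_q arc.2.1 hvL) hb) ?_
  exact pvOLE_oAdd _ (hmono_p arc.1 hal)

theorem pvBFPass_BInv {n start : Int} {arcs : List (Int × Int × Int)} {L R : List Int}
    (hc : pvCtx n start arcs L R) (hepts : ∀ s ∈ arcs, s.1 ∈ L ∧ s.2.1 ∈ L) :
    ∀ {dist : List (Option Int)}, pvBInv arcs n start L dist →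
      pvBInv arcs n start L (pvBFPass arcs dist) := by
  have hgen : ∀ (l : List (Int × Int × Int)), (∀ s ∈ l, s ∈ arcs) →
      ∀ dist, pvBInv arcs n start L dist →
        pvBInv arcs n start L (l.foldl pvRelaxArc dist) := by
    intro l
    induction l with
    | nil => intro _ dist h; exact h
    | cons a t ih =>
      intro hsub dist h
      rw [List.foldl_cons]
      have hm : a ∈ arcs := hsub a (by simp)
      exact ih (fun s hs => hsub s (by simp [hs])) _
        (pvRelaxArc_BInv hc hm (hepts a hm).1 (hepts a hm).2 h)
  intro dist h
  exact hgen arcs (fun s hs => hs) dist h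

theorem pvBFLoop_succ (arcs : List (Int × Int × Int)) :
    ∀ (k : Nat) (dist : List (Option Int)),
      pvBFLoop arcs (k + 1) dist = pvBFPass arcs (pvBFLoop arcs k dist) := by
  intro k
  induction k with
  | zero => intro dist; rfl
  | succ k ih => intro dist; rw [pvBFLoop, ih]; rfl

theorem pvBFLoop_BInv {n start : Int} {arcs : List (Int × Int × Int)} {L R : List Int}
    (hc : pvCtx n start arcs L R) (hepts : ∀ s ∈ arcs, s.1 ∈ L ∧ s.2.1 ∈ L) :
    ∀ (k : Nat) {dist : List (Option Int)}, pvBInv arcs n start L dist →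
      pvBInv arcs n start L (pvBFLoop arcs k dist) := by
  intro k
  induction k with
  | zero => intro dist h; exact h
  | succ k ih =>
    intro dist h
    rw [pvBFLoop_succ]
    exact pvBFPass_BInv hc hepts (ih h)

theorem pvBF_ub {n start : Int} {arcs : List (Int × Int × Int)} {L R : List Int}
    (hc : pvCtx n start arcs L R) (hepts : ∀ s ∈ arcs, s.1 ∈ L ∧ s.2.1 ∈ L) :
    ∀ (k : Nat) (dist : List (Option Int)), pvBInv arcs n start L dist →
      ∀ (ss : List (Int × Int × Int)) (z : Int), pvLinked arcs start ss z → ss.length ≤ k →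
        ∃ val, pvDget (pvBFLoop arcs k dist) z = some val ∧ val ≤ pvCost ss := by
  intro k
  induction k with
  | zero =>
    intro dist h ss z hss hl
    have : ss = [] := List.length_eq_zero_iff.mp (by omega)
    subst this
    cases hss
    exact ⟨0, h.2.1, le_of_eq pvCost_nil.symm⟩
  | succ k ih =>
    intro dist h ss z hss hl
    rw [pvBFLoop_succ]
    have hinv : pvBInv arcs n start L (pvBFLoop arcs k dist) := pvBFLoop_BInv hc hepts k h
    rcases List.eq_nil_or_concat ss with rfl | ⟨p, sl, rfl⟩
    · cases hss
      exact ⟨0, (pvBFPass_BInv hc hepts hinv).2.1, le_of_eq pvCost_nil.symm⟩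
    · rw [List.concat_eq_append] at hss hl ⊢
      obtain ⟨b, hb1, hb2⟩ := pvLinked_append.mp hss
      obtain ⟨hmem, hsa, hz⟩ := hb2
      obtain ⟨vu, hvu, hvule⟩ := ih dist h p b hb1 (by simp at hl; omega)
      have hrel := pvBFPass_relaxes hc hepts hinv.1 sl hmem
      rw [hsa, hvu] at hrel
      rw [hz]
      simp only [pvOAdd] at hrel
      obtain ⟨val, hval, hle⟩ := pvOLE_some_iff.mp hrel
      refine ⟨val, hval, ?_⟩
      rw [pvCost_append]
      have hcs : pvCost [sl] = sl.2.2 := by simp [pvCost]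
      rw [hcs]
      omega

-- ---------- Dijkstra (port A) analysis ----------

theorem pvLeLex_iff {a b : Int × Int} :
    pvLeLex a b = true ↔ (a.1 < b.1 ∨ (a.1 = b.1 ∧ a.2 ≤ b.2)) := by
  simp [pvLeLex]

theorem pvLeLex_refl (a : Int × Int) : pvLeLex a a = true := by
  rw [pvLeLex_iff]; omega

theorem pvLeLex_total {a b : Int × Int} (h : ¬ pvLeLex a b = true) : pvLeLex b a = true := by
  rw [pvLeLex_iff] at *; omega

theorem pvLeLex_trans {a b c : Int × Int} (h1 : pvLeLex a b = true) (h2 : pvLeLex b c = true) :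
    pvLeLex a c = true := by
  rw [pvLeLex_iff] at *; omega

theorem pvHeapMin_spec :
    ∀ (xs : List (Int × Int)) (x : Int × Int),
      pvHeapMin x xs ∈ x :: xs ∧ ∀ y ∈ x :: xs, pvLeLex (pvHeapMin x xs) y = true := by
  intro xs
  induction xs with
  | nil =>
    intro x
    constructor
    · simp [pvHeapMin]
    · intro y hy
      simp at hy
      subst hy
      exact pvLeLex_refl _
  | cons a t ih =>
    intro x
    have hx : pvHeapMin x (a :: t) = pvHeapMin (if pvLeLex x a then x else a) t := by
      simp [pvHeapMin]
    obtain ⟨ihm, ihle⟩ := ih (if pvLeLex x a then x else a)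
    have hxa : pvLeLex (pvHeapMin (if pvLeLex x a then x else a) t) x = true ∧
               pvLeLex (pvHeapMin (if pvLeLex x a then x else a) t) a = true := by
      have hhead := ihle (if pvLeLex x a = true then x else a) (List.mem_cons_self ..)
      by_cases hc : pvLeLex x a = true
      · rw [if_pos hc] at hhead ⊢
        exact ⟨hhead, pvLeLex_trans hhead hc⟩
      · rw [if_neg hc] at hhead ⊢
        exact ⟨pvLeLex_trans hhead (pvLeLex_total hc), hhead⟩
    constructor
    · rw [hx]
      rcases List.mem_cons.mp ihm with he | hm
      · rw [he]
        split_ifs <;> simp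
      · simp [hm]
    · intro y hy
      rw [hx]
      rcases List.mem_cons.mp hy with rfl | hy2
      · exact hxa.1
      · rcases List.mem_cons.mp hy2 with rfl | hy3
        · exact hxa.2
        · exact ihle y (by simp [hy3])

-- the Dijkstra loop invariant (history-free "live entry or fully relaxed" form)
def pvAInv (arcs : List (Int × Int × Int)) (graph : PySem.Dict Int (List (Int × Int)))
    (n start : Int) (L R : List Int) (dist : List (Option Int)) (heap : List (Int × Int)) :
    Prop :=
  dist.length = n.toNat ∧
  pvDget dist start = some 0 ∧
  (∀ i ∈ L, ∀ val, pvDget dist i = some val →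
    ∃ ss, pvLinked arcs start ss i ∧ pvCost ss = val) ∧
  (∀ p ∈ heap, p.2 ∈ L ∧ ∃ val, pvDget dist p.2 = some val ∧ val ≤ p.1) ∧
  (∀ y ∈ L, ∀ val, pvDget dist y = some val →
    ((val, y) ∈ heap ∨
      (y ∈ R ∧ ∀ vw ∈ graph.getD y ([] : List (Int × Int)),
        pvOLE (pvDget dist vw.1) (some (val + vw.2)))))

theorem pvAInv_nonneg {n start : Int} {arcs : List (Int × Int × Int)}
    {graph : PySem.Dict Int (List (Int × Int))} {L R : List Int}
    {dist : List (Option Int)} {heap : List (Int × Int)}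
    (hc : pvCtx n start arcs L R) (h : pvAInv arcs graph n start L R dist heap) :
    ∀ i ∈ L, ∀ val, pvDget dist i = some val → 0 ≤ val ∧ i ∈ R := by
  intro i hi val hv
  obtain ⟨ss, hss, hcst⟩ := h.2.2.1 i hi val hv
  have h1 := pvCost_nonneg hc hc.2.2.2.1 hss
  exact ⟨by omega, (pvWalk_R hc hc.2.2.2.1 hss).1⟩

-- every walk is dominated by dist or blocked by a live heap entry of no larger key
theorem pvW {n start : Int} {arcs : List (Int × Int × Int)}
    {graph : PySem.Dict Int (List (Int × Int))} {L R : List Int}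
    {dist : List (Option Int)} {heap : List (Int × Int)}
    (hc : pvCtx n start arcs L R)
    (hgr1 : ∀ u v w, (u, v, w) ∈ arcs → (v, w) ∈ graph.getD u ([] : List (Int × Int)))
    (hinv : pvAInv arcs graph n start L R dist heap) :
    ∀ (ss : List (Int × Int × Int)) (z : Int), pvLinked arcs start ss z →
      (∃ val, pvDget dist z = some val ∧ val ≤ pvCost ss) ∨
      (∃ p ∈ heap, pvDget dist p.2 = some p.1 ∧ p.1 ≤ pvCost ss) := by
  intro ss
  induction ss using List.reverseRecOn with
  | nil =>
    intro z hz
    cases hz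
    exact Or.inl ⟨0, hinv.2.1, le_of_eq pvCost_nil.symm⟩
  | append_singleton p s ihp =>
    intro z hz
    obtain ⟨su, sv, sw⟩ := s
    obtain ⟨b, hb1, hb2⟩ := pvLinked_append.mp hz
    obtain ⟨hmem, hsb, hzb⟩ := hb2
    simp only at hsb hzb
    have hbR : b ∈ R := (pvWalk_R hc hc.2.2.2.1 hb1).1
    have hw0 : 0 ≤ sw := by
      have := hc.2.2.2.2.2.2 _ hmem
      simp only at this
      exact this (by rw [hsb]; exact hbR)
    have hcs : pvCost (p ++ [(su, sv, sw)]) = pvCost p + sw := by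
      rw [pvCost_append]; simp [pvCost]
    rw [hcs]
    rcases ihp b hb1 with ⟨val, hval, hle⟩ | ⟨q, hq, hqd, hqle⟩
    · -- dist[b] ≤ cost p: b is finite, use the live-entry-or-relaxed invariant at b
      have hbL : b ∈ L := hc.2.2.2.2.1 b hbR
      rcases hinv.2.2.2.2 b hbL val hval with hlive | ⟨_, hrel⟩
      · exact Or.inr ⟨(val, b), hlive, hval, by omega⟩
      · have hadj : (sv, sw) ∈ graph.getD b ([] : List (Int × Int)) := by
          have h1 : (su, sv, sw) ∈ arcs := hmem
          rw [hsb] at h1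
          exact hgr1 b sv sw h1
        have := hrel _ hadj
        obtain ⟨vz, hvz, hvzle⟩ := pvOLE_some_iff.mp this
        rw [hzb]
        exact Or.inl ⟨vz, hvz, by omega⟩
    · exact Or.inr ⟨q, hq, hqd, by omega⟩

-- ---------- potential function for fuel accounting ----------

def pvC1 : Option Int → Nat
  | none => 0
  | some _ => 1

def pvCnt (dist : List (Option Int)) : Nat := (dist.map pvC1).sum

def pvPot (N : Nat) : Option Int → Nat
  | none => N + 1
  | some v => v.toNat

def pvPotD (N : Nat) (dist : List (Option Int)) : Nat := (dist.map (pvPot N)).sum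

def pvPhi (N : Nat) (dist : List (Option Int)) (heap : List (Int × Int)) : Nat :=
  heap.length + pvPotD N dist

def pvUB (maxW : Nat) (L : List Int) (dist : List (Option Int)) : Prop :=
  ∀ i ∈ L, ∀ val, pvDget dist i = some val → val.toNat ≤ pvCnt dist * maxW

theorem pvPotD_set {N : Nat} {dist : List (Option Int)} {i : Int} (x : Option Int)
    (h : pvSlot dist.length i < dist.length) :
    pvPotD N (pvDset dist i x) + pvPot N (pvDget dist i) = pvPotD N dist + pvPot N x := by
  have := pvSum_map_set (pvPot N) dist (pvSlot dist.length i) x h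
  have hg : dist.getD (pvSlot dist.length i) x = dist[pvSlot dist.length i] :=
    List.getD_eq_getElem dist x h
  rw [hg] at this
  rw [pvDget_eq_getElem h]
  exact this

theorem pvCnt_set {dist : List (Option Int)} {i : Int} (x : Option Int)
    (h : pvSlot dist.length i < dist.length) :
    pvCnt (pvDset dist i x) + pvC1 (pvDget dist i) = pvCnt dist + pvC1 x := by
  have := pvSum_map_set pvC1 dist (pvSlot dist.length i) x h
  have hg : dist.getD (pvSlot dist.length i) x = dist[pvSlot dist.length i] :=
    List.getD_eq_getElem dist x h
  rw [hg] at this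
  rw [pvDget_eq_getElem h]
  exact this

theorem pvCnt_le {dist : List (Option Int)} : pvCnt dist ≤ dist.length := by
  induction dist with
  | nil => simp [pvCnt]
  | cons a t ih =>
    simp only [pvCnt, List.map_cons, List.sum_cons, List.length_cons] at *
    have : pvC1 a ≤ 1 := by cases a <;> simp [pvC1]
    omega

theorem pvCnt_lt_aux :
    ∀ (dist : List (Option Int)) (k : Nat), k < dist.length → dist[k]? = some none →
      pvCnt dist + 1 ≤ dist.length := by
  intro dist
  induction dist with
  | nil => intro k h _; simp at h
  | cons a t ih =>
    intro k h hnone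
    cases k with
    | zero =>
      simp only [List.getElem?_cons_zero, Option.some.injEq] at hnone
      subst hnone
      simp only [pvCnt, List.map_cons, List.sum_cons, List.length_cons, pvC1]
      have := pvCnt_le (dist := t)
      simp only [pvCnt] at this
      omega
    | succ k =>
      have := ih k (by simpa using h) (by simpa using hnone)
      simp only [pvCnt, List.map_cons, List.sum_cons, List.length_cons] at *
      have hc1 : pvC1 a ≤ 1 := by cases a <;> simp [pvC1]
      omega

theorem pvCnt_lt {dist : List (Option Int)} {i : Int}
    (h : pvSlot dist.length i < dist.length) (hnone : pvDget dist i = none) :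
    pvCnt dist + 1 ≤ dist.length := by
  refine pvCnt_lt_aux dist (pvSlot dist.length i) h ?_
  rw [pvDget_eq_getElem h] at hnone
  rw [List.getElem?_eq_getElem h, hnone]

-- ---------- the inner relaxation loop of port A ----------

theorem pvRelaxA_cons (u : Int) (dist : List (Option Int)) (heap : List (Int × Int))
    (vw : Int × Int) (rest : List (Int × Int)) :
    pvRelaxA u (vw :: rest) (dist, heap) =
      pvRelaxA u rest (pvRelaxA u [vw] (dist, heap)) := by
  simp [pvRelaxA]

-- everything the outer loop needs to know about the inner `for v, w in graph[u]` fold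
theorem pvRelaxA_fold {n start : Int} {arcs : List (Int × Int × Int)} {L R : List Int}
    {maxW : Nat} (hc : pvCtx n start arcs L R)
    (hwle : ∀ s ∈ arcs, s.2.2.toNat ≤ maxW) (u : Int) (du : Int) (hdu0 : 0 ≤ du)
    (huL : u ∈ L) (huR : u ∈ R) :
    ∀ (nbrs : List (Int × Int)) (dist : List (Option Int)) (heap : List (Int × Int)),
      (∀ vw ∈ nbrs, (u, vw.1, vw.2) ∈ arcs) →
      pvBInv arcs n start L dist →
      pvDget dist u = some du →
      (∀ p ∈ heap, p.2 ∈ L ∧ ∃ val, pvDget dist p.2 = some val ∧ val ≤ p.1) →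
      pvUB maxW L dist →
      pvBInv arcs n start L (pvRelaxA u nbrs (dist, heap)).1 ∧
      (∀ i ∈ L, pvOLE (pvDget (pvRelaxA u nbrs (dist, heap)).1 i) (pvDget dist i)) ∧
      (pvDget (pvRelaxA u nbrs (dist, heap)).1 u = some du) ∧
      (∀ vw ∈ nbrs, pvOLE (pvDget (pvRelaxA u nbrs (dist, heap)).1 vw.1) (some (du + vw.2))) ∧
      (∀ p ∈ heap, p ∈ (pvRelaxA u nbrs (dist, heap)).2) ∧
      (∀ p ∈ (pvRelaxA u nbrs (dist, heap)).2, p.2 ∈ L ∧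
        ∃ val, pvDget (pvRelaxA u nbrs (dist, heap)).1 p.2 = some val ∧ val ≤ p.1) ∧
      (∀ y ∈ L,
        (pvDget (pvRelaxA u nbrs (dist, heap)).1 y = pvDget dist y ∨
          ∃ x, pvDget (pvRelaxA u nbrs (dist, heap)).1 y = some x ∧
            (x, y) ∈ (pvRelaxA u nbrs (dist, heap)).2)) ∧
      pvUB maxW L (pvRelaxA u nbrs (dist, heap)).1 ∧
      pvPhi (n.toNat * maxW) (pvRelaxA u nbrs (dist, heap)).1 (pvRelaxA u nbrs (dist, heap)).2 ≤
        pvPhi (n.toNat * maxW) dist heap := by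
  intro nbrs
  induction nbrs with
  | nil =>
    intro dist heap hnb hbinv hdu hent hub
    simp only [pvRelaxA, List.foldl_nil]
    refine ⟨hbinv, fun i _ => pvOLE_refl _, hdu, ?_, fun p hp => hp, hent,
      fun y _ => Or.inl (by trivial), hub, le_refl _⟩
    intro vw hvw
    simp at hvw
  | cons vw rest ih =>
    intro dist heap hnb hbinv hdu hent hub
    obtain ⟨hlen, hst, hach⟩ := hbinv
    have harc : (u, vw.1, vw.2) ∈ arcs := hnb vw (by simp)
    have hvL : vw.1 ∈ L := hc.2.2.2.2.1 _ (hc.2.2.2.2.2.1 _ harc huR)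
    have hw0 : 0 ≤ vw.2 := hc.2.2.2.2.2.2 _ harc huR
    have hvr : pvSlot dist.length vw.1 < dist.length := by
      rw [hlen]; exact pvCtx_slot_lt hc hvL
    have hrda : pvRelaxA u (vw :: rest) (dist, heap) =
        pvRelaxA u rest (pvRelaxA u [vw] (dist, heap)) := pvRelaxA_cons u dist heap vw rest
    rw [hrda]
    have hwle' : vw.2.toNat ≤ maxW := hwle _ harc
    have hdub : du.toNat ≤ pvCnt dist * maxW := hub u huL du hdu
    -- characterise the single step
    have hcase : ∃ d1 h1, pvRelaxA u [vw] (dist, heap) = (d1, h1) ∧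
        pvBInv arcs n start L d1 ∧
        (∀ i ∈ L, pvOLE (pvDget d1 i) (pvDget dist i)) ∧
        pvDget d1 u = some du ∧
        pvOLE (pvDget d1 vw.1) (some (du + vw.2)) ∧
        (∀ p ∈ heap, p ∈ h1) ∧
        (∀ p ∈ h1, p.2 ∈ L ∧ ∃ val, pvDget d1 p.2 = some val ∧ val ≤ p.1) ∧
        (∀ y ∈ L,
          (pvDget d1 y = pvDget dist y ∨ ∃ x, pvDget d1 y = some x ∧ (x, y) ∈ h1)) ∧
        pvUB maxW L d1 ∧
        pvPhi (n.toNat * maxW) d1 h1 ≤ pvPhi (n.toNat * maxW) dist heap := by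
      have hbnew := pvRelaxArc_BInv (arc := (u, vw.1, vw.2)) hc harc huL hvL ⟨hlen, hst, hach⟩
      have hmnew := pvRelaxArc_mono (arc := (u, vw.1, vw.2)) hc hlen hvL
      rcases hv : pvDget dist vw.1 with _ | dv
      · -- dist[v] = ∞ : assignment, v becomes finite
        have hstep : pvRelaxA u [vw] (dist, heap) =
            (pvDset dist vw.1 (some (du + vw.2)), heap ++ [(du + vw.2, vw.1)]) := by
          simp [pvRelaxA, hdu, hv]
        have hrd2 : pvRelaxArc dist (u, vw.1, vw.2) = pvDset dist vw.1 (some (du + vw.2)) := by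
          simp [pvRelaxArc, hdu, hv]
        rw [hrd2] at hbnew hmnew
        have hself : pvDget (pvDset dist vw.1 (some (du + vw.2))) vw.1 = some (du + vw.2) :=
          pvDget_set_self _ hvr
        have hcnt : pvCnt (pvDset dist vw.1 (some (du + vw.2))) + pvC1 none =
            pvCnt dist + pvC1 (some (du + vw.2)) := by rw [← hv]; exact pvCnt_set _ hvr
        simp only [pvC1] at hcnt
        have hcntlt : pvCnt dist + 1 ≤ dist.length := pvCnt_lt hvr hv
        have hnvbound : (du + vw.2).toNat ≤ (pvCnt dist + 1) * maxW := by
          have : (pvCnt dist + 1) * maxW = pvCnt dist * maxW + maxW := by ring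
          omega
        refine ⟨_, _, hstep, hbnew, fun i hi => hmnew i hi, ?_, ?_, ?_, ?_, ?_, ?_, ?_⟩
        · -- dist[u] unchanged: assigning to u would need a negative weight
          by_cases hue : u = vw.1
          · rw [← hue] at hv; rw [hdu] at hv; cases hv
          · rw [pvDget_set_ne _ (by rw [hlen]; exact pvCtx_slot_ne hc hvL huL (fun hh => hue hh.symm))]
            exact hdu
        · rw [hself]; simp [pvOLE]
        · intro p hp; exact List.mem_append_left _ hp
        · intro p hp
          rcases List.mem_append.mp hp with hp | hp
          · obtain ⟨hpL, val, hval, hle⟩ := hent p hp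
            obtain ⟨val2, hval2, hle2⟩ := pvOLE_some_iff.mp (hval ▸ hmnew p.2 hpL)
            exact ⟨hpL, val2, hval2, by omega⟩
          · simp at hp
            rw [hp]
            exact ⟨hvL, du + vw.2, hself, le_refl _⟩
        · intro y hy
          by_cases hyv : y = vw.1
          · right
            exact ⟨du + vw.2, by rw [hyv]; exact hself,
              List.mem_append_right _ (by rw [hyv]; simp)⟩
          · left
            exact pvDget_set_ne _ (by rw [hlen]; exact pvCtx_slot_ne hc hvL hy (fun hh => hyv hh.symm))
        · intro i hi val hvi
          have hc' : pvCnt (pvDset dist vw.1 (some (du + vw.2))) = pvCnt dist + 1 := by omega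
          by_cases hie : i = vw.1
          · rw [hie, hself] at hvi
            injection hvi with hvi
            rw [hc', ← hvi]
            exact hnvbound
          · rw [pvDget_set_ne _ (by rw [hlen]; exact pvCtx_slot_ne hc hvL hi (fun hh => hie hh.symm))] at hvi
            have := hub i hi val hvi
            have hmul : pvCnt dist * maxW ≤ (pvCnt dist + 1) * maxW :=
              Nat.mul_le_mul_right _ (by omega)
            rw [hc']
            omega
        · have hpot : pvPotD (n.toNat * maxW) (pvDset dist vw.1 (some (du + vw.2))) +
              pvPot (n.toNat * maxW) none =
              pvPotD (n.toNat * maxW) dist + pvPot (n.toNat * maxW) (some (du + vw.2)) := by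
            rw [← hv]; exact pvPotD_set _ hvr
          simp only [pvPot] at hpot
          have hnvN : (du + vw.2).toNat ≤ n.toNat * maxW := by
            have h1 : (pvCnt dist + 1) * maxW ≤ n.toNat * maxW :=
              Nat.mul_le_mul_right _ (by omega)
            omega
          simp only [pvPhi, List.length_append, List.length_cons, List.length_nil]
          omega
      · by_cases hlt : du + vw.2 < dv
        · -- dist[v] strictly improves
          have hstep : pvRelaxA u [vw] (dist, heap) =
              (pvDset dist vw.1 (some (du + vw.2)), heap ++ [(du + vw.2, vw.1)]) := by
            simp [pvRelaxA, hdu, hv, hlt]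
          have hrd2 : pvRelaxArc dist (u, vw.1, vw.2) = pvDset dist vw.1 (some (du + vw.2)) := by
            simp [pvRelaxArc, hdu, hv, hlt]
          rw [hrd2] at hbnew hmnew
          have hself : pvDget (pvDset dist vw.1 (some (du + vw.2))) vw.1 = some (du + vw.2) :=
            pvDget_set_self _ hvr
          have hcnt : pvCnt (pvDset dist vw.1 (some (du + vw.2))) + pvC1 (some dv) =
              pvCnt dist + pvC1 (some (du + vw.2)) := by rw [← hv]; exact pvCnt_set _ hvr
          simp only [pvC1] at hcnt
          have hdvb : dv.toNat ≤ pvCnt dist * maxW := hub vw.1 hvL dv hv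
          refine ⟨_, _, hstep, hbnew, fun i hi => hmnew i hi, ?_, ?_, ?_, ?_, ?_, ?_, ?_⟩
          · by_cases hue : u = vw.1
            · rw [← hue] at hv; rw [hdu] at hv
              injection hv with hv
              omega
            · rw [pvDget_set_ne _ (by rw [hlen]; exact pvCtx_slot_ne hc hvL huL (fun hh => hue hh.symm))]
              exact hdu
          · rw [hself]; simp [pvOLE]
          · intro p hp; exact List.mem_append_left _ hp
          · intro p hp
            rcases List.mem_append.mp hp with hp | hp
            · obtain ⟨hpL, val, hval, hle⟩ := hent p hp
              obtain ⟨val2, hval2, hle2⟩ := pvOLE_some_iff.mp (hval ▸ hmnew p.2 hpL)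
              exact ⟨hpL, val2, hval2, by omega⟩
            · simp at hp
              rw [hp]
              exact ⟨hvL, du + vw.2, hself, le_refl _⟩
          · intro y hy
            by_cases hyv : y = vw.1
            · right
              exact ⟨du + vw.2, by rw [hyv]; exact hself,
                List.mem_append_right _ (by rw [hyv]; simp)⟩
            · left
              exact pvDget_set_ne _ (by rw [hlen]; exact pvCtx_slot_ne hc hvL hy (fun hh => hyv hh.symm))
          · intro i hi val hvi
            have hc' : pvCnt (pvDset dist vw.1 (some (du + vw.2))) = pvCnt dist := by omega
            by_cases hie : i = vw.1
            · rw [hie, hself] at hvi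
              injection hvi with hvi
              rw [hc', ← hvi]
              omega
            · rw [pvDget_set_ne _ (by rw [hlen]; exact pvCtx_slot_ne hc hvL hi (fun hh => hie hh.symm))] at hvi
              rw [hc']
              exact hub i hi val hvi
          · have hpot : pvPotD (n.toNat * maxW) (pvDset dist vw.1 (some (du + vw.2))) +
                pvPot (n.toNat * maxW) (some dv) =
                pvPotD (n.toNat * maxW) dist + pvPot (n.toNat * maxW) (some (du + vw.2)) := by
              rw [← hv]; exact pvPotD_set _ hvr
            simp only [pvPot] at hpot
            simp only [pvPhi, List.length_append, List.length_cons, List.length_nil]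
            omega
        · -- no improvement: nothing changes
          have hstep : pvRelaxA u [vw] (dist, heap) = (dist, heap) := by
            simp [pvRelaxA, hdu, hv, hlt]
          refine ⟨dist, heap, hstep, ⟨hlen, hst, hach⟩, fun i _ => pvOLE_refl _, hdu, ?_,
            fun p hp => hp, hent, fun y _ => Or.inl rfl, hub, le_refl _⟩
          rw [hv]
          simp only [pvOLE]
          omega
    obtain ⟨d1, h1, hstep, B1, M1, U1, R1, S1, E1, K1, UB1, P1⟩ := hcase
    rw [hstep]
    obtain ⟨B2, M2, U2, R2, S2, E2, K2, UB2, P2⟩ :=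
      ih d1 h1 (fun w hw => hnb w (List.mem_cons_of_mem _ hw)) B1 U1 E1 UB1
    refine ⟨B2, ?_, U2, ?_, ?_, E2, ?_, UB2, le_trans P2 P1⟩
    · intro i hi
      exact pvOLE_trans (M2 i hi) (M1 i hi)
    · intro w hw
      rcases List.mem_cons.mp hw with rfl | hw
      · exact pvOLE_trans (M2 w.1 hvL) R1
      · exact R2 w hw
    · intro p hp
      exact S2 p (S1 p hp)
    · intro y hy
      rcases K2 y hy with heq | ⟨x, hx1, hx2⟩
      · rcases K1 y hy with heq2 | ⟨x, hx1, hx2⟩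
        · left; rw [heq, heq2]
        · right; exact ⟨x, heq ▸ hx1, S2 _ hx2⟩
      · right; exact ⟨x, hx1, hx2⟩

-- at an empty heap, every finite node is fully relaxed: dist[end] is the shortest distance
theorem pvDij_empty {n start end_ : Int} {arcs : List (Int × Int × Int)}
    {graph : PySem.Dict Int (List (Int × Int))} {L R : List Int} {dist : List (Option Int)}
    (hc : pvCtx n start arcs L R) (heL : end_ ∈ L)
    (hgr1 : ∀ u v w, (u, v, w) ∈ arcs → (v, w) ∈ graph.getD u ([] : List (Int × Int)))
    (hinv : pvAInv arcs graph n start L R dist []) :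
    pvIsSP arcs start end_ (pvDget dist end_) := by
  refine ⟨fun val hval => hinv.2.2.1 end_ heL val hval, ?_⟩
  intro ss hss
  rcases pvW hc hgr1 hinv ss end_ hss with ⟨val, h1, h2⟩ | ⟨p, hp, _⟩
  · exact ⟨val, h1, h2⟩
  · simp at hp

theorem pvDij_correct {n start end_ : Int} {arcs : List (Int × Int × Int)}
    {graph : PySem.Dict Int (List (Int × Int))} {L R : List Int} {maxW : Nat}
    (hc : pvCtx n start arcs L R) (heL : end_ ∈ L)
    (hwle : ∀ s ∈ arcs, s.2.2.toNat ≤ maxW)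
    (hgr1 : ∀ u v w, (u, v, w) ∈ arcs → (v, w) ∈ graph.getD u ([] : List (Int × Int)))
    (hgr2 : ∀ u v w, u ∈ R → (v, w) ∈ graph.getD u ([] : List (Int × Int)) → (u, v, w) ∈ arcs) :
    ∀ (fuel : Nat) (dist : List (Option Int)) (heap : List (Int × Int)),
      pvAInv arcs graph n start L R dist heap → pvUB maxW L dist →
      pvPhi (n.toNat * maxW) dist heap ≤ fuel →
      pvIsSP arcs start end_ (pvDget (pvDijkstra graph end_ fuel dist heap) end_) := by
  intro fuel
  induction fuel with
  | zero =>
    intro dist heap hinv hub hphi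
    have hheap : heap = [] := by
      have : heap.length = 0 := by simp only [pvPhi] at hphi; omega
      exact List.length_eq_zero_iff.mp this
    subst hheap
    exact pvDij_empty hc heL hgr1 hinv
  | succ fuel ih =>
    intro dist heap hinv hub hphi
    rcases heap with _ | ⟨x, xs⟩
    · exact pvDij_empty hc heL hgr1 hinv
    · obtain ⟨hmem, hmin⟩ := pvHeapMin_spec xs x
      set m := pvHeapMin x xs with hm
      obtain ⟨hmL, val, hval, hvle⟩ := hinv.2.2.2.1 m hmem
      have hlenE : ((x :: xs).erase m).length = xs.length := by
        rw [List.length_erase_of_mem hmem]; simp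
      by_cases hlt : val < m.1
      · -- stale entry: skip it
        have hred : pvDijkstra graph end_ (fuel + 1) dist (x :: xs) =
            pvDijkstra graph end_ fuel dist ((x :: xs).erase m) := by
          simp only [pvDijkstra, ← hm, hval]
          rw [if_pos (by simp [hlt])]
        rw [hred]
        refine ih dist _ ⟨hinv.1, hinv.2.1, hinv.2.2.1, ?_, ?_⟩ hub ?_
        · intro p hp
          exact hinv.2.2.2.1 p (List.mem_of_mem_erase hp)
        · intro y hy v hv
          rcases hinv.2.2.2.2 y hy v hv with hlive | hrel
          · left
            refine (List.mem_erase_of_ne ?_).mpr hlive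
            intro hne
            have hy2 : y = m.2 := by rw [← hne]
            have hv1 : v = m.1 := by rw [← hne]
            rw [hy2, hval] at hv
            injection hv with hv
            omega
          · right; exact hrel
        · simp only [pvPhi] at hphi ⊢
          rw [hlenE]
          simp at hphi
          omega
      · -- genuine minimum: val = m.1
        have hveq : val = m.1 := by omega
        have hv0R := pvAInv_nonneg hc hinv m.2 hmL val hval
        by_cases hend : m.2 = end_
        · -- u == end: break with the true shortest distance
          have hred : pvDijkstra graph end_ (fuel + 1) dist (x :: xs) = dist := by
            simp only [pvDijkstra, ← hm, hval]
            rw [if_neg (by simp [hlt]), if_pos hend]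
          rw [hred]
          refine ⟨fun v hv => hinv.2.2.1 end_ heL v hv, ?_⟩
          intro ss hss
          rcases pvW hc hgr1 hinv ss end_ hss with ⟨v, h1, h2⟩ | ⟨p, hp, hpd, hple⟩
          · exact ⟨v, h1, h2⟩
          · have hlex := hmin p hp
            rw [pvLeLex_iff] at hlex
            refine ⟨val, by rw [← hend]; exact hval, ?_⟩
            omega
        · -- relax all of u's neighbours
          have hred : pvDijkstra graph end_ (fuel + 1) dist (x :: xs) =
              pvDijkstra graph end_ fuel
                (pvRelaxA m.2 (graph.getD m.2 []) (dist, (x :: xs).erase m)).1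
                (pvRelaxA m.2 (graph.getD m.2 []) (dist, (x :: xs).erase m)).2 := by
            simp only [pvDijkstra, ← hm, hval]
            rw [if_neg (by simp [hlt]), if_neg hend]
          rw [hred]
          have hnb : ∀ vw ∈ graph.getD m.2 ([] : List (Int × Int)),
              (m.2, vw.1, vw.2) ∈ arcs := by
            intro vw hvw
            exact hgr2 m.2 vw.1 vw.2 hv0R.2 hvw
          obtain ⟨B2, M2, U2, R2, S2, E2, K2, UB2, P2⟩ :=
            pvRelaxA_fold hc hwle m.2 val hv0R.1 hmL hv0R.2 (graph.getD m.2 [])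
              dist ((x :: xs).erase m) hnb ⟨hinv.1, hinv.2.1, hinv.2.2.1⟩ hval
              (fun p hp => hinv.2.2.2.1 p (List.mem_of_mem_erase hp)) hub
          refine ih _ _ ⟨B2.1, B2.2.1, B2.2.2, E2, ?_⟩ UB2 ?_
          · -- re-establish the live-entry-or-relaxed invariant
            intro y hy v hv
            by_cases hyu : y = m.2
            · subst hyu
              rw [U2] at hv
              injection hv with hv
              right
              refine ⟨hv0R.2, ?_⟩
              intro vw hvw
              rw [← hv]
              exact R2 vw hvw
            · rcases K2 y hy with heq | ⟨xv, hx1, hx2⟩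
              · rw [heq] at hv
                rcases hinv.2.2.2.2 y hy v hv with hlive | ⟨hyR, hrel⟩
                · left
                  refine S2 _ ((List.mem_erase_of_ne ?_).mpr hlive)
                  intro hne
                  apply hyu
                  have : ((v, y) : Int × Int).2 = m.2 := by rw [hne]
                  simpa using this
                · right
                  refine ⟨hyR, ?_⟩
                  intro vw hvw
                  have hva : (y, vw.1, vw.2) ∈ arcs := hgr2 y vw.1 vw.2 hyR hvw
                  have hbL : vw.1 ∈ L := hc.2.2.2.2.1 _ (hc.2.2.2.2.2.1 _ hva hyR)
                  exact pvOLE_trans (M2 vw.1 hbL) (hrel vw hvw)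
              · left
                rw [hx1] at hv
                injection hv with hv
                rw [← hv]
                exact hx2
          · have hphiE : pvPhi (n.toNat * maxW) dist ((x :: xs).erase m) + 1 =
                pvPhi (n.toNat * maxW) dist (x :: xs) := by
              simp only [pvPhi, hlenE]
              simp
              omega
            omega

-- ---------- both ports build the same effective arc set ----------

-- the symmetrised non-restricted arc list both ports' behaviour is measured against
def pvArcs (edges : List (Int × Int × Int)) (banned : PySem.Set (Int × Int)) :
    List (Int × Int × Int) :=
  edges.foldl (fun a e =>
    if (if e.1 ≤ e.2.1 then (e.1, e.2.1) else (e.2.1, e.1)) ∈ banned then a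
    else a ++ [(e.1, e.2.1, e.2.2), (e.2.1, e.1, e.2.2)]) []


def pvGenG (edges : List (Int × Int × Int)) (rs : PySem.Set (Int × Int)) (u v w : Int) : Prop :=
  ∃ e ∈ edges, ((if e.1 ≤ e.2.1 then (e.1, e.2.1) else (e.2.1, e.1)) ∉ rs) ∧ e.2.2 = w ∧
    ((e.1 = u ∧ e.2.1 = v) ∨ (e.1 = v ∧ e.2.1 = u))

theorem pvArcs_mem_gen (rs : PySem.Set (Int × Int)) :
    ∀ (es : List (Int × Int × Int)) (acc : List (Int × Int × Int)) (u v w : Int),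
      ((u, v, w) ∈ es.foldl (fun a e =>
        if (if e.1 ≤ e.2.1 then (e.1, e.2.1) else (e.2.1, e.1)) ∈ rs then a
        else a ++ [(e.1, e.2.1, e.2.2), (e.2.1, e.1, e.2.2)]) acc) ↔
      ((u, v, w) ∈ acc ∨ pvGenG es rs u v w) := by
  intro es
  induction es with
  | nil =>
    intro acc u v w
    simp [pvGenG]
  | cons e t ih =>
    intro acc u v w
    rw [List.foldl_cons]
    rw [ih]
    have hgen : pvGenG (e :: t) rs u v w ↔
        (((if e.1 ≤ e.2.1 then (e.1, e.2.1) else (e.2.1, e.1)) ∉ rs) ∧ e.2.2 = w ∧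
          ((e.1 = u ∧ e.2.1 = v) ∨ (e.1 = v ∧ e.2.1 = u))) ∨ pvGenG t rs u v w := by
      simp only [pvGenG, List.mem_cons]
      constructor
      · rintro ⟨f, (rfl | hf), h⟩
        · exact Or.inl h
        · exact Or.inr ⟨f, hf, h⟩
      · rintro (h | ⟨f, hf, h⟩)
        · exact ⟨e, Or.inl rfl, h⟩
        · exact ⟨f, Or.inr hf, h⟩
    rw [hgen]
    by_cases hb : (if e.1 ≤ e.2.1 then (e.1, e.2.1) else (e.2.1, e.1)) ∈ rs
    · rw [if_pos hb]
      constructor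
      · rintro (h | h)
        · exact Or.inl h
        · exact Or.inr (Or.inr h)
      · rintro (h | (⟨hnb, _⟩ | h))
        · exact Or.inl h
        · exact absurd hb hnb
        · exact Or.inr h
    · rw [if_neg hb]
      have hm : ((u, v, w) ∈ acc ++ [(e.1, e.2.1, e.2.2), (e.2.1, e.1, e.2.2)]) ↔
          ((u, v, w) ∈ acc ∨
            (e.2.2 = w ∧ ((e.1 = u ∧ e.2.1 = v) ∨ (e.1 = v ∧ e.2.1 = u)))) := by
        simp only [List.mem_append, List.mem_cons, List.not_mem_nil, or_false, Prod.mk.injEq]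
        constructor
        · rintro (h | (⟨h1, h2, h3⟩ | ⟨h1, h2, h3⟩))
          · exact Or.inl h
          · exact Or.inr ⟨h3.symm, Or.inl ⟨h1.symm, h2.symm⟩⟩
          · exact Or.inr ⟨h3.symm, Or.inr ⟨h2.symm, h1.symm⟩⟩
        · rintro (h | ⟨hw, (⟨h1, h2⟩ | ⟨h1, h2⟩)⟩)
          · exact Or.inl h
          · exact Or.inr (Or.inl ⟨h1.symm, h2.symm, hw.symm⟩)
          · exact Or.inr (Or.inr ⟨h2.symm, h1.symm, hw.symm⟩)
      rw [hm]
      constructor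
      · rintro ((h | h) | h)
        · exact Or.inl h
        · exact Or.inr (Or.inl ⟨hb, h⟩)
        · exact Or.inr (Or.inr h)
      · rintro (h | (⟨_, h⟩ | h))
        · exact Or.inl (Or.inl h)
        · exact Or.inl (Or.inr h)
        · exact Or.inr h

theorem pvGraphA_mem_gen (rs : PySem.Set (Int × Int)) :
    ∀ (es : List (Int × Int × Int)) (g : PySem.Dict Int (List (Int × Int))) (u v w : Int),
      ((v, w) ∈ (es.foldl (fun g e =>
        if pvNormPair e.1 e.2.1 ∈ rs then g
        else
          let g1 := g.modify e.1 [] (fun l => l ++ [(e.2.1, e.2.2)])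
          g1.modify e.2.1 [] (fun l => l ++ [(e.1, e.2.2)])) g).getD u ([] : List (Int × Int))) ↔
      ((v, w) ∈ g.getD u ([] : List (Int × Int)) ∨ pvGenG es rs u v w) := by
  intro es
  induction es with
  | nil =>
    intro g u v w
    simp [pvGenG]
  | cons e t ih =>
    intro g u v w
    rw [List.foldl_cons]
    have hgen : pvGenG (e :: t) rs u v w ↔
        (((if e.1 ≤ e.2.1 then (e.1, e.2.1) else (e.2.1, e.1)) ∉ rs) ∧ e.2.2 = w ∧
          ((e.1 = u ∧ e.2.1 = v) ∨ (e.1 = v ∧ e.2.1 = u))) ∨ pvGenG t rs u v w := by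
      simp only [pvGenG, List.mem_cons]
      constructor
      · rintro ⟨f, (rfl | hf), h⟩
        · exact Or.inl h
        · exact Or.inr ⟨f, hf, h⟩
      · rintro (h | ⟨f, hf, h⟩)
        · exact ⟨e, Or.inl rfl, h⟩
        · exact ⟨f, Or.inr hf, h⟩
    rw [hgen]
    by_cases hb : (if e.1 ≤ e.2.1 then (e.1, e.2.1) else (e.2.1, e.1)) ∈ rs
    · have hb' : pvNormPair e.1 e.2.1 ∈ rs := hb
      rw [if_pos hb']
      rw [ih]
      constructor
      · rintro (h | h)
        · exact Or.inl h
        · exact Or.inr (Or.inr h)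
      · rintro (h | (⟨hnb, _⟩ | h))
        · exact Or.inl h
        · exact absurd hb hnb
        · exact Or.inr h
    · have hb' : ¬ pvNormPair e.1 e.2.1 ∈ rs := hb
      rw [if_neg hb']
      rw [ih]
      have hgd : ∀ z : Int,
          ((g.modify e.1 [] (fun l => l ++ [(e.2.1, e.2.2)])).getD z ([] : List (Int × Int))) =
            if z = e.1 then g.getD e.1 [] ++ [(e.2.1, e.2.2)] else g.getD z [] :=
        fun z => PySem.Dict.getD_modify _ _ _ _ _
      have hgd2 :
          (((g.modify e.1 [] (fun l => l ++ [(e.2.1, e.2.2)])).modify e.2.1 []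
              (fun l => l ++ [(e.1, e.2.2)])).getD u ([] : List (Int × Int))) =
            if u = e.2.1 then
              (if e.2.1 = e.1 then g.getD e.1 [] ++ [(e.2.1, e.2.2)] else g.getD e.2.1 []) ++
                [(e.1, e.2.2)]
            else if u = e.1 then g.getD e.1 [] ++ [(e.2.1, e.2.2)] else g.getD u [] := by
        rw [PySem.Dict.getD_modify _ _ _ _ _]
        by_cases h1 : u = e.2.1
        · rw [if_pos h1, if_pos h1, hgd]
        · rw [if_neg h1, if_neg h1, hgd]
      have hkey : ((v, w) ∈
          (((g.modify e.1 [] (fun l => l ++ [(e.2.1, e.2.2)])).modify e.2.1 []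
              (fun l => l ++ [(e.1, e.2.2)])).getD u ([] : List (Int × Int)))) ↔
          ((v, w) ∈ g.getD u ([] : List (Int × Int)) ∨
            (e.2.2 = w ∧ ((e.1 = u ∧ e.2.1 = v) ∨ (e.1 = v ∧ e.2.1 = u)))) := by
        rw [hgd2]
        by_cases h1 : u = e.2.1
        · rw [if_pos h1]
          by_cases h2 : e.2.1 = e.1
          · rw [if_pos h2]
            simp only [List.mem_append, List.mem_cons, List.not_mem_nil, or_false, Prod.mk.injEq]
            constructor
            · rintro ((h | ⟨hv, hw⟩) | ⟨hv, hw⟩)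
              · exact Or.inl (by rw [h1, h2]; exact h)
              · exact Or.inr ⟨hw.symm, Or.inr ⟨h2.symm.trans hv.symm, h1.symm⟩⟩
              · exact Or.inr ⟨hw.symm, Or.inr ⟨hv.symm, h1.symm⟩⟩
            · rintro (h | ⟨hw, (⟨hu', hv'⟩ | ⟨hu', hv'⟩)⟩)
              · exact Or.inl (Or.inl (by rw [h1, h2] at h; exact h))
              · exact Or.inl (Or.inr ⟨hv'.symm, hw.symm⟩)
              · exact Or.inr ⟨hu'.symm, hw.symm⟩
          · rw [if_neg h2]
            simp only [List.mem_append, List.mem_cons, List.not_mem_nil, or_false, Prod.mk.injEq]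
            constructor
            · rintro (h | ⟨hv, hw⟩)
              · exact Or.inl (by rw [h1]; exact h)
              · exact Or.inr ⟨hw.symm, Or.inr ⟨hv.symm, h1.symm⟩⟩
            · rintro (h | ⟨hw, (⟨hu', hv'⟩ | ⟨hu', hv'⟩)⟩)
              · exact Or.inl (by rw [h1] at h; exact h)
              · exact absurd (h1.symm.trans hu'.symm) h2
              · exact Or.inr ⟨hu'.symm, hw.symm⟩
        · rw [if_neg h1]
          by_cases h3 : u = e.1
          · rw [if_pos h3]
            simp only [List.mem_append, List.mem_cons, List.not_mem_nil, or_false, Prod.mk.injEq]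
            constructor
            · rintro (h | ⟨hv, hw⟩)
              · exact Or.inl (by rw [h3]; exact h)
              · exact Or.inr ⟨hw.symm, Or.inl ⟨h3.symm, hv.symm⟩⟩
            · rintro (h | ⟨hw, (⟨hu', hv'⟩ | ⟨hu', hv'⟩)⟩)
              · exact Or.inl (by rw [h3] at h; exact h)
              · exact Or.inr ⟨hv'.symm, hw.symm⟩
              · exact absurd hv'.symm h1
          · rw [if_neg h3]
            constructor
            · exact fun h => Or.inl h
            · rintro (h | ⟨hw, (⟨hu', hv'⟩ | ⟨hu', hv'⟩)⟩)
              · exact h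
              · exact absurd hu'.symm h3
              · exact absurd hv'.symm h1
      rw [hkey]
      constructor
      · rintro ((h | h) | h)
        · exact Or.inl h
        · exact Or.inr (Or.inl ⟨hb, h⟩)
        · exact Or.inr (Or.inr h)
      · rintro (h | (⟨_, h⟩ | h))
        · exact Or.inl (Or.inl h)
        · exact Or.inl (Or.inr h)
        · exact Or.inr h

-- the two ports see the same graph: adjacency of A's dict = membership in B's arc list
theorem pvGraph_arcs (edges : List (Int × Int × Int)) (restricted : List (Int × Int))
    (u v w : Int) :
    (u, v, w) ∈ pvArcs edges (pvBanned restricted) ↔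
      (v, w) ∈ (pvGraphA edges (pvRestrictedSet restricted)).getD u ([] : List (Int × Int)) := by
  have hrs : pvRestrictedSet restricted = pvBanned restricted := rfl
  rw [hrs]
  unfold pvArcs pvGraphA
  rw [pvArcs_mem_gen (pvBanned restricted) edges [] u v w]
  rw [pvGraphA_mem_gen (pvBanned restricted) edges PySem.Dict.empty u v w]
  have h1 : ((u, v, w) ∈ ([] : List (Int × Int × Int))) ↔ False := by simp
  have h2 : ((v, w) ∈ (PySem.Dict.empty : PySem.Dict Int (List (Int × Int))).getD u
      ([] : List (Int × Int))) ↔ False := by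
    rw [PySem.Dict.getD_empty]; simp
  rw [h1, h2]

-- membership in the arc list through the non-restricted edge list
theorem pvArcs_iff (edges : List (Int × Int × Int)) (restricted : List (Int × Int))
    (u v w : Int) :
    (u, v, w) ∈ pvArcs edges (pvBanned restricted) ↔
      ∃ e ∈ pvNRes edges restricted, e.2.2 = w ∧
        ((e.1 = u ∧ e.2.1 = v) ∨ (e.1 = v ∧ e.2.1 = u)) := by
  unfold pvArcs
  rw [pvArcs_mem_gen (pvBanned restricted) edges [] u v w]
  simp only [List.not_mem_nil, false_or]
  unfold pvGenG pvNRes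
  constructor
  · rintro ⟨e, he, hnb, h⟩
    refine ⟨e, List.mem_filter.mpr ⟨he, ?_⟩, h⟩
    simp only [decide_eq_true_eq]
    show pvNormPair e.1 e.2.1 ∉ pvRestrictedSet restricted
    simpa [pvNormPair, pvRestrictedSet, pvBanned] using hnb
  · rintro ⟨e, he, h⟩
    obtain ⟨he1, he2⟩ := List.mem_filter.mp he
    simp only [decide_eq_true_eq] at he2
    refine ⟨e, he1, ?_, h⟩
    simpa [pvNormPair, pvRestrictedSet, pvBanned] using he2

theorem pvMaxW_init : ∀ (es : List (Int × Int × Int)) (a : Nat),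
    a ≤ es.foldl (fun m e => max m e.2.2.toNat) a := by
  intro es
  induction es with
  | nil => intro a; exact le_refl _
  | cons e t ih =>
    intro a
    rw [List.foldl_cons]
    exact le_trans (Nat.le_max_left _ _) (ih _)

theorem pvMaxW_mem : ∀ (es : List (Int × Int × Int)) (a : Nat), ∀ e ∈ es,
    e.2.2.toNat ≤ es.foldl (fun m e => max m e.2.2.toNat) a := by
  intro es
  induction es with
  | nil => intro a e he; simp at he
  | cons f t ih =>
    intro a e he
    rw [List.foldl_cons]
    rcases List.mem_cons.mp he with rfl | he
    · exact le_trans (Nat.le_max_right _ _) (pvMaxW_init t _)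
    · exact ih _ e he

-- ---------- the connected component Pre_ computes is closed under the arcs ----------

theorem pvAdd_append (s : List Int) (x : Int) : ∃ t, PySem.Set.add s x = s ++ t := by
  rw [PySem.Set.add_eq_ite]
  split
  · exact ⟨[], by simp⟩
  · exact ⟨[x], rfl⟩

theorem pvCompG_append (R : List Int) (e : Int × Int × Int) : ∃ t, pvCompG R e = R ++ t := by
  unfold pvCompG
  split
  · obtain ⟨t1, h1⟩ := pvAdd_append R e.1
    obtain ⟨t2, h2⟩ := pvAdd_append (PySem.Set.add R e.1) e.2.1
    exact ⟨t1 ++ t2, by rw [h2, h1, List.append_assoc]⟩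
  · exact ⟨[], by simp⟩

theorem pvCompStep_append (es : List (Int × Int × Int)) :
    ∀ (R : List Int), ∃ t, pvCompStep es R = R ++ t := by
  induction es with
  | nil => intro R; exact ⟨[], by simp [pvCompStep]⟩
  | cons e t ih =>
    intro R
    obtain ⟨t1, h1⟩ := pvCompG_append R e
    obtain ⟨t2, h2⟩ := ih (pvCompG R e)
    refine ⟨t1 ++ t2, ?_⟩
    show (e :: t).foldl pvCompG R = R ++ (t1 ++ t2)
    rw [List.foldl_cons]
    show pvCompStep t (pvCompG R e) = R ++ (t1 ++ t2)
    rw [h2, h1, List.append_assoc]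

theorem pvCompG_grow {R : List Int} {x : Int} (h : x ∈ R) (e : Int × Int × Int) :
    x ∈ pvCompG R e := by
  obtain ⟨t, ht⟩ := pvCompG_append R e
  rw [ht]
  exact List.mem_append_left _ h

theorem pvCompStep_grow {es : List (Int × Int × Int)} {R : List Int} {x : Int} (h : x ∈ R) :
    x ∈ pvCompStep es R := by
  obtain ⟨t, ht⟩ := pvCompStep_append es R
  rw [ht]
  exact List.mem_append_left _ h

theorem pvCompG_nodup {R : List Int} (h : R.Nodup) (e : Int × Int × Int) :
    (pvCompG R e).Nodup := by
  unfold pvCompG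
  split
  · exact PySem.Set.nodup_add _ _ (PySem.Set.nodup_add _ _ h)
  · exact h

theorem pvCompStep_nodup (es : List (Int × Int × Int)) :
    ∀ {R : List Int}, R.Nodup → (pvCompStep es R).Nodup := by
  induction es with
  | nil => intro R h; exact h
  | cons e t ih =>
    intro R h
    show (pvCompStep t (pvCompG R e)).Nodup
    exact ih (pvCompG_nodup h e)

theorem pvCompG_mem_bound {R : List Int} {x : Int} {e : Int × Int × Int}
    (h : x ∈ pvCompG R e) : x ∈ R ∨ x = e.1 ∨ x = e.2.1 := by
  unfold pvCompG at h
  split at h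
  · rcases (PySem.Set.mem_add _ _ _).mp h with h2 | h2
    · rcases (PySem.Set.mem_add _ _ _).mp h2 with h3 | h3
      · exact Or.inl h3
      · exact Or.inr (Or.inl h3)
    · exact Or.inr (Or.inr h2)
  · exact Or.inl h

theorem pvCompStep_mem_bound (es : List (Int × Int × Int)) :
    ∀ {R : List Int} {x : Int}, x ∈ pvCompStep es R →
      x ∈ R ∨ ∃ e ∈ es, x = e.1 ∨ x = e.2.1 := by
  induction es with
  | nil => intro R x h; exact Or.inl h
  | cons e t ih =>
    intro R x h
    rcases ih (R := pvCompG R e) h with h2 | ⟨f, hf, hx⟩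
    · rcases pvCompG_mem_bound h2 with h3 | h3
      · exact Or.inl h3
      · exact Or.inr ⟨e, by simp, h3⟩
    · exact Or.inr ⟨f, by simp [hf], hx⟩

theorem pvCompIter_mem_bound (es : List (Int × Int × Int)) :
    ∀ (k : Nat) {R : List Int} {x : Int}, x ∈ pvCompIter es k R →
      x ∈ R ∨ ∃ e ∈ es, x = e.1 ∨ x = e.2.1 := by
  intro k
  induction k with
  | zero => intro R x h; exact Or.inl h
  | succ k ih =>
    intro R x h
    rcases ih (R := pvCompStep es R) h with h2 | h2
    · exact pvCompStep_mem_bound es h2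
    · exact Or.inr h2

theorem pvCompIter_nodup (es : List (Int × Int × Int)) :
    ∀ (k : Nat) {R : List Int}, R.Nodup → (pvCompIter es k R).Nodup := by
  intro k
  induction k with
  | zero => intro R h; exact h
  | succ k ih => intro R h; exact ih (pvCompStep_nodup es h)

theorem pvCompIter_grow (es : List (Int × Int × Int)) :
    ∀ (k : Nat) {R : List Int} {x : Int}, x ∈ R → x ∈ pvCompIter es k R := by
  intro k
  induction k with
  | zero => intro R x h; exact h
  | succ k ih => intro R x h; exact ih (pvCompStep_grow h)

theorem pvCompIter_add (es : List (Int × Int × Int)) :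
    ∀ (a b : Nat) (R : List Int),
      pvCompIter es (a + b) R = pvCompIter es b (pvCompIter es a R) := by
  intro a
  induction a with
  | zero =>
    intro b R
    rw [Nat.zero_add]
    rfl
  | succ a ih =>
    intro b R
    have h1 : a + 1 + b = (a + b) + 1 := by omega
    rw [h1]
    show pvCompIter es (a + b) (pvCompStep es R) = pvCompIter es b (pvCompIter es a (pvCompStep es R))
    exact ih b (pvCompStep es R)

theorem pvCompIter_fix (es : List (Int × Int × Int)) {R : List Int}
    (h : pvCompStep es R = R) : ∀ k, pvCompIter es k R = R := by
  intro k
  induction k with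
  | zero => rfl
  | succ k ih =>
    show pvCompIter es k (pvCompStep es R) = R
    rw [h]
    exact ih

theorem pvCompIter_succ_out (es : List (Int × Int × Int)) :
    ∀ (k : Nat) (R : List Int),
      pvCompIter es (k + 1) R = pvCompStep es (pvCompIter es k R) := by
  intro k
  induction k with
  | zero => intro R; rfl
  | succ k ih =>
    intro R
    show pvCompIter es (k + 1) (pvCompStep es R) = pvCompStep es (pvCompIter es (k + 1) R)
    rw [ih (pvCompStep es R)]
    rfl

theorem pvCompIter_growth (es : List (Int × Int × Int)) :
    ∀ (m : Nat) (R0 : List Int),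
      (∀ j, j < m → pvCompStep es (pvCompIter es j R0) ≠ pvCompIter es j R0) →
      R0.length + m ≤ (pvCompIter es m R0).length := by
  intro m
  induction m with
  | zero => intro R0 _; simp [pvCompIter]
  | succ m ih =>
    intro R0 h
    have h1 := ih R0 (fun j hj => h j (by omega))
    have h2 := h m (by omega)
    rw [pvCompIter_succ_out]
    obtain ⟨t, ht⟩ := pvCompStep_append es (pvCompIter es m R0)
    have htne : t ≠ [] := by
      intro hnil
      rw [hnil, List.append_nil] at ht
      exact h2 ht
    have hlt : 1 ≤ t.length := by
      rcases t with _ | _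
      · exact absurd rfl htne
      · simp
    rw [ht, List.length_append]
    omega

theorem pvComp_closed (edges : List (Int × Int × Int)) (restricted : List (Int × Int))
    (start : Int) :
    pvCompStep (pvNRes edges restricted) (pvComp edges restricted start) =
      pvComp edges restricted start := by
  by_cases h : ∃ j, j < 2 * (pvNRes edges restricted).length + 1 ∧
      pvCompStep (pvNRes edges restricted) (pvCompIter (pvNRes edges restricted) j [start]) =
        pvCompIter (pvNRes edges restricted) j [start]
  · obtain ⟨j, hj, hfix⟩ := h
    have hsplit : 2 * (pvNRes edges restricted).length + 1 =
        j + (2 * (pvNRes edges restricted).length + 1 - j) := by omega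
    have heq : pvComp edges restricted start = pvCompIter (pvNRes edges restricted) j [start] := by
      unfold pvComp
      rw [hsplit, pvCompIter_add]
      exact pvCompIter_fix _ hfix _
    rw [heq]
    exact hfix
  · exfalso
    push_neg at h
    have hgrow := pvCompIter_growth (pvNRes edges restricted)
      (2 * (pvNRes edges restricted).length + 1) [start] (fun j hj => h j hj)
    have hnd : (pvCompIter (pvNRes edges restricted)
        (2 * (pvNRes edges restricted).length + 1) [start]).Nodup :=
      pvCompIter_nodup _ _ (by simp)
    have hsub : ∀ x ∈ pvCompIter (pvNRes edges restricted)
        (2 * (pvNRes edges restricted).length + 1) [start],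
        x ∈ start :: (pvNRes edges restricted).flatMap (fun e => [e.1, e.2.1]) := by
      intro x hx
      rcases pvCompIter_mem_bound _ _ hx with h2 | ⟨e, he, h2⟩
      · simp at h2
        simp [h2]
      · refine List.mem_cons_of_mem _ (List.mem_flatMap.mpr ⟨e, he, ?_⟩)
        rcases h2 with rfl | rfl <;> simp
    have hflen : ((pvNRes edges restricted).flatMap (fun e => [e.1, e.2.1])).length =
        2 * (pvNRes edges restricted).length := by
      induction pvNRes edges restricted with
      | nil => simp
      | cons e t ih => simp at ih ⊢; omega
    have hble := pvNodup_subset_length _ _ hnd hsub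
    simp only [List.length_cons, hflen] at hble
    simp only [List.length_cons, List.length_nil] at hgrow
    omega

theorem pvCompStep_mem_target (es : List (Int × Int × Int)) :
    ∀ (e : Int × Int × Int), e ∈ es → ∀ (R : List Int), (e.1 ∈ R ∨ e.2.1 ∈ R) →
      e.1 ∈ pvCompStep es R ∧ e.2.1 ∈ pvCompStep es R := by
  induction es with
  | nil => intro e he; simp at he
  | cons f t ih =>
    intro e he R hcond
    rcases List.mem_cons.mp he with rfl | he2
    · have hcondf : e.1 ∈ R ∨ e.2.1 ∈ R := hcond
      have hG : pvCompG R e = PySem.Set.add (PySem.Set.add R e.1) e.2.1 := by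
        unfold pvCompG
        rw [if_pos hcondf]
      have h1 : e.1 ∈ pvCompG R e := by
        rw [hG]
        exact (PySem.Set.mem_add _ _ _).mpr (Or.inl ((PySem.Set.mem_add _ _ _).mpr (Or.inr rfl)))
      have h2 : e.2.1 ∈ pvCompG R e := by
        rw [hG]
        exact (PySem.Set.mem_add _ _ _).mpr (Or.inr rfl)
      constructor
      · show e.1 ∈ pvCompStep t (pvCompG R e)
        exact pvCompStep_grow h1
      · show e.2.1 ∈ pvCompStep t (pvCompG R e)
        exact pvCompStep_grow h2
    · have hcond' : e.1 ∈ pvCompG R f ∨ e.2.1 ∈ pvCompG R f := by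
        rcases hcond with h | h
        · exact Or.inl (pvCompG_grow h f)
        · exact Or.inr (pvCompG_grow h f)
      exact ih e he2 (pvCompG R f) hcond'

-- a step stays inside any step-closed superset
theorem pvCompStep_subset_closed (es : List (Int × Int × Int)) {T : List Int}
    (hT : ∀ e ∈ es, (e.1 ∈ T ∨ e.2.1 ∈ T) → e.1 ∈ T ∧ e.2.1 ∈ T) :
    ∀ (R : List Int), (∀ x ∈ R, x ∈ T) → ∀ x ∈ pvCompStep es R, x ∈ T := by
  induction es with
  | nil => intro R hR x hx; exact hR x hx
  | cons f t ih =>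
    intro R hR x hx
    have hG : ∀ y ∈ pvCompG R f, y ∈ T := by
      intro y hy
      unfold pvCompG at hy
      split at hy
      · next hcond =>
          have hTf : f.1 ∈ T ∧ f.2.1 ∈ T := by
            refine hT f (by simp) ?_
            rcases hcond with h | h
            · exact Or.inl (hR _ h)
            · exact Or.inr (hR _ h)
          rcases (PySem.Set.mem_add _ _ _).mp hy with h2 | h2
          · rcases (PySem.Set.mem_add _ _ _).mp h2 with h3 | h3
            · exact hR y h3
            · rw [h3]; exact hTf.1
          · rw [h2]; exact hTf.2
      · exact hR y hy
    exact ih (fun e he => hT e (by simp [he])) (pvCompG R f) hG x hx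

theorem pvCompLoopB_grow (es : List (Int × Int × Int)) :
    ∀ (f : Nat) {R : List Int} {x : Int}, x ∈ R → x ∈ pvCompLoopB es f R := by
  intro f
  induction f with
  | zero => intro R x h; exact h
  | succ f ih =>
    intro R x h
    simp only [pvCompLoopB]
    split
    · exact h
    · exact ih (pvCompStep_grow h)

theorem pvCompLoopB_mem_bound (es : List (Int × Int × Int)) :
    ∀ (f : Nat) {R : List Int} {x : Int}, x ∈ pvCompLoopB es f R →
      x ∈ R ∨ ∃ e ∈ es, x = e.1 ∨ x = e.2.1 := by
  intro f
  induction f with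
  | zero => intro R x h; exact Or.inl h
  | succ f ih =>
    intro R x h
    simp only [pvCompLoopB] at h
    split at h
    · exact Or.inl h
    · rcases ih h with h2 | h2
      · exact pvCompStep_mem_bound es h2
      · exact Or.inr h2

theorem pvCompLoopB_subset_closed (es : List (Int × Int × Int)) {T : List Int}
    (hT : ∀ e ∈ es, (e.1 ∈ T ∨ e.2.1 ∈ T) → e.1 ∈ T ∧ e.2.1 ∈ T) :
    ∀ (f : Nat) {R : List Int}, (∀ x ∈ R, x ∈ T) → ∀ x ∈ pvCompLoopB es f R, x ∈ T := by
  intro f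
  induction f with
  | zero => intro R hR x hx; exact hR x hx
  | succ f ih =>
    intro R hR x hx
    simp only [pvCompLoopB] at hx
    split at hx
    · exact hR x hx
    · exact ih (pvCompStep_subset_closed es hT R hR) x hx

-- the loop's fuel is always sufficient: its result is a fixpoint of the pass
theorem pvCompLoopB_fix (es : List (Int × Int × Int)) (S : List Int)
    (hSe : ∀ e ∈ es, e.1 ∈ S ∧ e.2.1 ∈ S) :
    ∀ (f : Nat) (R : List Int), R.Nodup → (∀ x ∈ R, x ∈ S) →
      S.length + 1 ≤ f + R.length →
      pvCompStep es (pvCompLoopB es f R) = pvCompLoopB es f R := by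
  intro f
  induction f with
  | zero =>
    intro R hnd hsub hf
    exact absurd (pvNodup_subset_length R S hnd hsub) (by omega)
  | succ f ih =>
    intro R hnd hsub hf
    simp only [pvCompLoopB]
    obtain ⟨t, ht⟩ := pvCompStep_append es R
    by_cases hlen : (pvCompStep es R).length = R.length
    · rw [if_pos hlen]
      have htn : t.length = 0 := by
        rw [ht, List.length_append] at hlen
        omega
      have : t = [] := List.length_eq_zero_iff.mp htn
      rw [ht, this, List.append_nil]
    · rw [if_neg hlen]
      have hsub' : ∀ x ∈ pvCompStep es R, x ∈ S := by
        intro x hx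
        rcases pvCompStep_mem_bound es hx with h2 | ⟨e, he, h2⟩
        · exact hsub x h2
        · rcases h2 with rfl | rfl
          · exact (hSe e he).1
          · exact (hSe e he).2
      have hgrow : R.length + 1 ≤ (pvCompStep es R).length := by
        have htn : t ≠ [] := by
          intro hnil
          rw [ht, hnil, List.append_nil] at hlen
          exact hlen rfl
        have h1 : 1 ≤ t.length := by
          rcases t with _ | _
          · exact absurd rfl htn
          · simp
        rw [ht, List.length_append]
        omega
      exact ih (pvCompStep es R) (pvCompStep_nodup es hnd) hsub' (by omega)

-- membership in B's component-restricted arc list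
theorem pvArcsC_mem_gen (comp : List Int) :
    ∀ (es : List (Int × Int × Int)) (acc : List (Int × Int × Int)) (u v w : Int),
      ((u, v, w) ∈ es.foldl (fun a e =>
        if e.1 ∈ comp then a ++ [(e.1, e.2.1, e.2.2), (e.2.1, e.1, e.2.2)] else a) acc) ↔
      ((u, v, w) ∈ acc ∨ ∃ e ∈ es, e.1 ∈ comp ∧ e.2.2 = w ∧
        ((e.1 = u ∧ e.2.1 = v) ∨ (e.1 = v ∧ e.2.1 = u))) := by
  intro es
  induction es with
  | nil =>
    intro acc u v w
    simp
  | cons e t ih =>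
    intro acc u v w
    rw [List.foldl_cons, ih]
    have hsplit : (∃ f ∈ e :: t, f.1 ∈ comp ∧ f.2.2 = w ∧
        ((f.1 = u ∧ f.2.1 = v) ∨ (f.1 = v ∧ f.2.1 = u))) ↔
        ((e.1 ∈ comp ∧ e.2.2 = w ∧ ((e.1 = u ∧ e.2.1 = v) ∨ (e.1 = v ∧ e.2.1 = u))) ∨
          ∃ f ∈ t, f.1 ∈ comp ∧ f.2.2 = w ∧
            ((f.1 = u ∧ f.2.1 = v) ∨ (f.1 = v ∧ f.2.1 = u))) := by
      simp only [List.mem_cons]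
      constructor
      · rintro ⟨f, (rfl | hf), h⟩
        · exact Or.inl h
        · exact Or.inr ⟨f, hf, h⟩
      · rintro (h | ⟨f, hf, h⟩)
        · exact ⟨e, Or.inl rfl, h⟩
        · exact ⟨f, Or.inr hf, h⟩
    rw [hsplit]
    by_cases hcm : e.1 ∈ comp
    · rw [if_pos hcm]
      have hm : ((u, v, w) ∈ acc ++ [(e.1, e.2.1, e.2.2), (e.2.1, e.1, e.2.2)]) ↔
          ((u, v, w) ∈ acc ∨
            (e.2.2 = w ∧ ((e.1 = u ∧ e.2.1 = v) ∨ (e.1 = v ∧ e.2.1 = u)))) := by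
        simp only [List.mem_append, List.mem_cons, List.not_mem_nil, or_false, Prod.mk.injEq]
        constructor
        · rintro (h | (⟨h1, h2, h3⟩ | ⟨h1, h2, h3⟩))
          · exact Or.inl h
          · exact Or.inr ⟨h3.symm, Or.inl ⟨h1.symm, h2.symm⟩⟩
          · exact Or.inr ⟨h3.symm, Or.inr ⟨h2.symm, h1.symm⟩⟩
        · rintro (h | ⟨hw, (⟨h1, h2⟩ | ⟨h1, h2⟩)⟩)
          · exact Or.inl h
          · exact Or.inr (Or.inl ⟨h1.symm, h2.symm, hw.symm⟩)
          · exact Or.inr (Or.inr ⟨h2.symm, h1.symm, hw.symm⟩)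
      rw [hm]
      constructor
      · rintro ((h | h) | h)
        · exact Or.inl h
        · exact Or.inr (Or.inl ⟨hcm, h⟩)
        · exact Or.inr (Or.inr h)
      · rintro (h | (⟨_, h⟩ | h))
        · exact Or.inl (Or.inl h)
        · exact Or.inl (Or.inr h)
        · exact Or.inr h
    · rw [if_neg hcm]
      constructor
      · rintro (h | h)
        · exact Or.inl h
        · exact Or.inr (Or.inr h)
      · rintro (h | (⟨hcm2, _⟩ | h))
        · exact Or.inl h
        · exact absurd hcm2 hcm
        · exact Or.inr h

-- B's usable list is exactly the filter Pre_ reasons about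
theorem pvUsable_aux (rs : PySem.Set (Int × Int)) :
    ∀ (es : List (Int × Int × Int)) (acc : List (Int × Int × Int)),
      es.foldl (fun a e =>
        if (if e.1 ≤ e.2.1 then (e.1, e.2.1) else (e.2.1, e.1)) ∈ rs then a
        else a ++ [e]) acc =
      acc ++ es.filter (fun e =>
        decide ((if e.1 ≤ e.2.1 then (e.1, e.2.1) else (e.2.1, e.1)) ∉ rs)) := by
  intro es
  induction es with
  | nil => intro acc; simp
  | cons e t ih =>
    intro acc
    rw [List.foldl_cons, List.filter_cons]
    by_cases hb : (if e.1 ≤ e.2.1 then (e.1, e.2.1) else (e.2.1, e.1)) ∈ rs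
    · rw [if_pos hb, ih]
      simp [hb]
    · rw [if_neg hb, ih]
      simp [hb]

theorem pvUsable_eq (edges : List (Int × Int × Int)) (restricted : List (Int × Int)) :
    pvUsable edges (pvBanned restricted) = pvNRes edges restricted := by
  unfold pvUsable
  rw [pvUsable_aux]
  rfl

theorem pvLinked_mono {a1 a2 : List (Int × Int × Int)} (hsub : ∀ s ∈ a1, s ∈ a2) :
    ∀ {ss : List (Int × Int × Int)} {a b : Int}, pvLinked a1 a ss b → pvLinked a2 a ss b := by
  intro ss
  induction ss with
  | nil => intro a b h; exact h
  | cons x t ih =>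
    intro a b h
    obtain ⟨hm, h1, h2⟩ := h
    exact ⟨hsub x hm, h1, ih h2⟩

theorem pvComp_start (edges : List (Int × Int × Int)) (restricted : List (Int × Int))
    (start : Int) : start ∈ pvComp edges restricted start :=
  pvCompIter_grow _ _ (by simp)

theorem pvEndsLen (es : List (Int × Int × Int)) :
    (es.flatMap (fun e => [e.1, e.2.1])).length = 2 * es.length := by
  induction es with
  | nil => simp
  | cons e t ih => simp at ih ⊢; omega

-- ===== VERDICT (by name: the statement is the Claim_ definition above) =====
theorem shortestPathWithRestrictedEdges_spec : Claim_equal_shortestPathWithRestrictedEdges := by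
  intro n edges restricted start end_ hdom hpre
  obtain ⟨hn1, hs0, hsn, he0, hen, hce, hinj⟩ := hpre
  unfold Spec_shortestPathWithRestrictedEdges
  set es := pvNRes edges restricted with hes
  set ces := pvCompEdges edges restricted start with hces
  set arcs := pvArcs edges (pvBanned restricted) with harcs
  set L := pvLabels edges restricted start end_ with hL
  set Rc := pvComp edges restricted start with hR
  set mw := pvMaxW edges with hmw
  set dist0 := pvDset (List.replicate n.toNat none) start (some 0) with hdist0
  set RB := pvCompLoopB es (2 * es.length + 2) [start] with hRBdef
  set arcsC := pvArcsC es RB with harcsC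
  have hsL : start ∈ L := by rw [hL]; simp [pvLabels]
  have heL : end_ ∈ L := by rw [hL]; simp [pvLabels]
  have hfm : ∀ e ∈ ces, e.1 ∈ L ∧ e.2.1 ∈ L := by
    intro e he
    constructor <;>
    · rw [hL]
      unfold pvLabels
      refine List.mem_cons_of_mem _ (List.mem_cons_of_mem _ (List.mem_flatMap.mpr ⟨e, ?_, ?_⟩))
      · rw [← hces]; exact he
      · simp
  have hcemem : ∀ e, e ∈ ces ↔ e ∈ es ∧ (e.1 ∈ Rc ∨ e.2.1 ∈ Rc) := by
    intro e
    rw [hces]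
    unfold pvCompEdges
    rw [List.mem_filter]
    simp only [decide_eq_true_eq]
    rw [← hes, ← hR]
  have hLbound : ∀ x ∈ L, -n ≤ x ∧ x < n := by
    intro x hx
    rw [hL] at hx
    unfold pvLabels at hx
    rcases List.mem_cons.mp hx with rfl | hx
    · omega
    rcases List.mem_cons.mp hx with rfl | hx
    · omega
    obtain ⟨e, he, hx2⟩ := List.mem_flatMap.mp hx
    have hb := hce e he
    simp only [List.mem_cons, List.not_mem_nil, or_false] at hx2
    rcases hx2 with rfl | rfl
    · exact ⟨hb.1, hb.2.1⟩
    · exact ⟨hb.2.2.1, hb.2.2.2.1⟩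
  have harcmem : ∀ u v w : Int, (u, v, w) ∈ arcs →
      ∃ e ∈ es, e.2.2 = w ∧ ((e.1 = u ∧ e.2.1 = v) ∨ (e.1 = v ∧ e.2.1 = u)) := by
    intro u v w h
    exact (pvArcs_iff edges restricted u v w).mp h
  -- B's component loop: start is in it, it is a fixpoint of the pass, and it is contained
  -- in the bounded-iteration component Pre_ reasons about
  have hstartB : start ∈ RB := pvCompLoopB_grow es _ (by simp)
  have hfixB : pvCompStep es RB = RB := by
    refine pvCompLoopB_fix es (start :: es.flatMap (fun e => [e.1, e.2.1])) ?_ _ [start]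
      (by simp) ?_ ?_
    · intro e he
      constructor <;>
      · refine List.mem_cons_of_mem _ (List.mem_flatMap.mpr ⟨e, he, ?_⟩)
        simp
    · intro x hx
      simp only [List.mem_cons, List.not_mem_nil, or_false] at hx
      simp [hx]
    · rw [List.length_cons, pvEndsLen]
      simp only [List.length_cons, List.length_nil]
      omega
  have hclosedB : ∀ e ∈ es, (e.1 ∈ RB ∨ e.2.1 ∈ RB) → e.1 ∈ RB ∧ e.2.1 ∈ RB := by
    intro e he hc
    have h2 := pvCompStep_mem_target es e he RB hc
    rw [hfixB] at h2
    exact h2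
  have hRcClosed : ∀ e ∈ es, (e.1 ∈ Rc ∨ e.2.1 ∈ Rc) → e.1 ∈ Rc ∧ e.2.1 ∈ Rc := by
    intro e he hc
    have h2 := pvCompStep_mem_target es e he Rc hc
    have h3 : pvCompStep es Rc = Rc := pvComp_closed edges restricted start
    rw [h3] at h2
    exact h2
  have hBsubR : ∀ x ∈ RB, x ∈ Rc := by
    intro x hx
    refine pvCompLoopB_subset_closed es hRcClosed (2 * es.length + 2) (R := [start]) ?_ x hx
    intro y hy
    simp only [List.mem_cons, List.not_mem_nil, or_false] at hy
    rw [hy, hR]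
    exact pvComp_start edges restricted start
  have hBL : ∀ x ∈ RB, x ∈ L := by
    intro x hx
    rcases pvCompLoopB_mem_bound es _ hx with h2 | ⟨e, he, hor⟩
    · simp only [List.mem_cons, List.not_mem_nil, or_false] at h2
      rw [h2]; exact hsL
    · have htouch : e.1 ∈ Rc ∨ e.2.1 ∈ Rc := by
        rcases hor with rfl | rfl
        · exact Or.inl (hBsubR _ hx)
        · exact Or.inr (hBsubR _ hx)
      have hec : e ∈ ces := (hcemem e).mpr ⟨he, htouch⟩
      obtain ⟨h1, h2⟩ := hfm e hec
      rcases hor with rfl | rfl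
      · exact h1
      · exact h2
  have hctxA : pvCtx n start arcs L RB := by
    refine ⟨hLbound, ?_, hsL, hstartB, hBL, ?_, ?_⟩
    · intro x hx y hy h
      exact hinj x hx y hy h
    · rintro ⟨u, v, w⟩ hs hu
      obtain ⟨e, he, hw, hor⟩ := harcmem u v w hs
      have htouch : e.1 ∈ RB ∨ e.2.1 ∈ RB := by
        rcases hor with ⟨h1, h2⟩ | ⟨h1, h2⟩
        · exact Or.inl (by rw [h1]; exact hu)
        · exact Or.inr (by rw [h2]; exact hu)
      have hboth := hclosedB e he htouch
      rcases hor with ⟨h1, h2⟩ | ⟨h1, h2⟩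
      · exact by rw [show ((u, v, w) : Int × Int × Int).2.1 = v from rfl, ← h2]; exact hboth.2
      · exact by rw [show ((u, v, w) : Int × Int × Int).2.1 = v from rfl, ← h1]; exact hboth.1
    · rintro ⟨u, v, w⟩ hs hu
      obtain ⟨e, he, hw, hor⟩ := harcmem u v w hs
      have htouch : e.1 ∈ Rc ∨ e.2.1 ∈ Rc := by
        rcases hor with ⟨h1, h2⟩ | ⟨h1, h2⟩
        · exact Or.inl (by rw [h1]; exact hBsubR _ hu)
        · exact Or.inr (by rw [h2]; exact hBsubR _ hu)
      have hec : e ∈ ces := (hcemem e).mpr ⟨he, htouch⟩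
      have := (hce e hec).2.2.2.2
      simpa [← hw] using this
  have harcsCmem : ∀ u v w : Int, (u, v, w) ∈ arcsC ↔
      ∃ e ∈ es, e.1 ∈ RB ∧ e.2.2 = w ∧
        ((e.1 = u ∧ e.2.1 = v) ∨ (e.1 = v ∧ e.2.1 = u)) := by
    intro u v w
    rw [harcsC]
    unfold pvArcsC
    rw [pvArcsC_mem_gen RB es [] u v w]
    simp only [List.not_mem_nil, false_or]
  have hsubC : ∀ s ∈ arcsC, s ∈ arcs := by
    rintro ⟨u, v, w⟩ hs
    obtain ⟨e, he, _, hw, hor⟩ := (harcsCmem u v w).mp hs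
    exact (pvArcs_iff edges restricted u v w).mpr ⟨e, hes ▸ he, hw, hor⟩
  have hctxC : pvCtx n start arcsC L RB := by
    refine ⟨hLbound, ?_, hsL, hstartB, hBL, ?_, ?_⟩
    · intro x hx y hy h
      exact hinj x hx y hy h
    · exact fun s hs => hctxA.2.2.2.2.2.1 s (hsubC s hs)
    · exact fun s hs => hctxA.2.2.2.2.2.2 s (hsubC s hs)
  have heptsC : ∀ s ∈ arcsC, s.1 ∈ L ∧ s.2.1 ∈ L := by
    rintro ⟨u, v, w⟩ hs
    obtain ⟨e, he, hin, hw, hor⟩ := (harcsCmem u v w).mp hs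
    have hboth := hclosedB e he (Or.inl hin)
    have huL : e.1 ∈ L := hBL _ hboth.1
    have hvL : e.2.1 ∈ L := hBL _ hboth.2
    rcases hor with ⟨h1, h2⟩ | ⟨h1, h2⟩
    · constructor
      · show u ∈ L
        rw [← h1]; exact huL
      · show v ∈ L
        rw [← h2]; exact hvL
    · constructor
      · show u ∈ L
        rw [← h2]; exact hvL
      · show v ∈ L
        rw [← h1]; exact huL
  have hWalkAC : ∀ (ss : List (Int × Int × Int)) (a z : Int), a ∈ RB →
      pvLinked arcs a ss z → pvLinked arcsC a ss z := by
    intro ss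
    induction ss with
    | nil => intro a z _ h; exact h
    | cons x t ih =>
      intro a z ha h
      obtain ⟨u, v, w⟩ := x
      obtain ⟨hm, hx1, h2⟩ := h
      have huRB : u ∈ RB := by
        have : ((u, v, w) : Int × Int × Int).1 = a := hx1
        rw [show ((u, v, w) : Int × Int × Int).1 = u from rfl] at this
        rw [this]; exact ha
      obtain ⟨e, he, hw, hor⟩ := harcmem u v w hm
      have htouch : e.1 ∈ RB ∨ e.2.1 ∈ RB := by
        rcases hor with ⟨h1, _⟩ | ⟨_, h2⟩
        · exact Or.inl (by rw [h1]; exact huRB)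
        · exact Or.inr (by rw [h2]; exact huRB)
      have hboth := hclosedB e he htouch
      have hmC : (u, v, w) ∈ arcsC := (harcsCmem u v w).mpr ⟨e, he, hboth.1, hw, hor⟩
      have hvRB : v ∈ RB := hctxA.2.2.2.2.2.1 (u, v, w) hm huRB
      exact ⟨hmC, hx1, ih _ z hvRB h2⟩
  have hwle : ∀ s ∈ arcs, s.2.2.toNat ≤ mw := by
    rintro ⟨u, v, w⟩ hs
    obtain ⟨e, he, hw, _⟩ := harcmem u v w hs
    have hee : e ∈ edges := (List.mem_filter.mp (hes ▸ he)).1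
    have := pvMaxW_mem edges 0 e hee
    rw [hmw]
    unfold pvMaxW
    simp only at this ⊢
    omega
  have hgr1 : ∀ u v w, (u, v, w) ∈ arcs →
      (v, w) ∈ (pvGraphA edges (pvRestrictedSet restricted)).getD u ([] : List (Int × Int)) :=
    fun u v w h => (pvGraph_arcs edges restricted u v w).mp h
  have hgr2 : ∀ u v w, u ∈ RB →
      (v, w) ∈ (pvGraphA edges (pvRestrictedSet restricted)).getD u ([] : List (Int × Int)) →
      (u, v, w) ∈ arcs :=
    fun u v w _ h => (pvGraph_arcs edges restricted u v w).mpr h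
  -- the initial dist array (shared by both ports)
  have hsr : pvSlot (List.replicate n.toNat (none : Option Int)).length start <
      (List.replicate n.toNat (none : Option Int)).length := by
    rw [List.length_replicate]
    exact pvSlot_lt (by omega) (by omega)
  have hlen0 : dist0.length = n.toNat := by
    rw [hdist0, pvDset_length, List.length_replicate]
  have hst0 : pvDget dist0 start = some 0 := by
    rw [hdist0]
    exact pvDget_set_self _ hsr
  have hrepl : ∀ i : Int, pvDget (List.replicate n.toNat (none : Option Int)) i = none := by
    intro i
    unfold pvDget
    simp only [List.length_replicate, List.getD, List.getElem?_replicate]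
    split <;> rfl
  have honly : ∀ i val, pvDget dist0 i = some val →
      pvSlot n.toNat i = pvSlot n.toNat start ∧ val = 0 := by
    intro i val hv
    by_cases hslot : pvSlot n.toNat i = pvSlot n.toNat start
    · refine ⟨hslot, ?_⟩
      have h1 : pvDget dist0 i = dist0.getD (pvSlot n.toNat i) none := by
        unfold pvDget; rw [hlen0]
      have h2 : pvDget dist0 start = dist0.getD (pvSlot n.toNat start) none := by
        unfold pvDget; rw [hlen0]
      rw [h1, hslot, ← h2, hst0] at hv
      injection hv with hv
      omega
    · have hne : pvSlot (List.replicate n.toNat (none : Option Int)).length start ≠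
          pvSlot (List.replicate n.toNat (none : Option Int)).length i := by
        rw [List.length_replicate]
        exact fun hh => hslot hh.symm
      rw [hdist0, pvDget_set_ne _ hne, hrepl] at hv
      cases hv
  have hach0 : ∀ (al : List (Int × Int × Int)), ∀ i ∈ L, ∀ val, pvDget dist0 i = some val →
      ∃ ss, pvLinked al start ss i ∧ pvCost ss = val := by
    intro al i hi val hv
    obtain ⟨hslot, hval⟩ := honly i val hv
    have his : i = start := hctxA.2.1 i hi start hsL hslot
    subst his
    refine ⟨[], ?_, ?_⟩
    · show i = i; rfl
    · rw [hval]; rfl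
  have hub0 : pvUB mw L dist0 := by
    intro i hi val hv
    have := (honly i val hv).2
    rw [this]
    simp
  have hAinv0 : pvAInv arcs (pvGraphA edges (pvRestrictedSet restricted)) n start L RB
      dist0 [(0, start)] := by
    refine ⟨hlen0, hst0, hach0 arcs, ?_, ?_⟩
    · intro p hp
      simp only [List.mem_cons, List.not_mem_nil, or_false] at hp
      rw [hp]
      exact ⟨hsL, 0, hst0, le_refl 0⟩
    · intro y hy val hv
      obtain ⟨hslot, hval⟩ := honly y val hv
      have hys : y = start := hctxA.2.1 y hy start hsL hslot
      left
      rw [hys, hval]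
      simp
  have hphi0 : pvPhi (n.toNat * mw) dist0 [(0, start)] ≤ pvFuelA n edges := by
    have hpd : pvPotD (n.toNat * mw) (List.replicate n.toNat (none : Option Int)) =
        n.toNat * (n.toNat * mw + 1) := by
      simp [pvPotD, pvPot, List.map_replicate, List.sum_replicate, smul_eq_mul]
    have hset := pvPotD_set (N := n.toNat * mw)
      (dist := List.replicate n.toNat (none : Option Int)) (i := start) (some 0) hsr
    rw [hrepl start] at hset
    simp only [pvPot, Int.toNat_zero] at hset
    unfold pvFuelA
    rw [← hmw]
    have hmul : n.toNat * (n.toNat * mw + 2) = n.toNat * (n.toNat * mw + 1) + n.toNat := by ring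
    simp only [pvPhi, List.length_cons, List.length_nil]
    rw [hdist0]
    omega
  have hA := pvDij_correct (graph := pvGraphA edges (pvRestrictedSet restricted))
    hctxA heL hwle hgr1 hgr2 (pvFuelA n edges) dist0 [(0, start)] hAinv0 hub0 hphi0
  -- B's Bellman-Ford over the component-restricted arcs
  have hBinv0C : pvBInv arcsC n start L dist0 := ⟨hlen0, hst0, hach0 arcsC⟩
  have hBspC : pvIsSP arcsC start end_ (pvDget (pvBFLoop arcsC (n - 1).toNat dist0) end_) := by
    constructor
    · exact fun val hv => (pvBFLoop_BInv hctxC heptsC ((n - 1).toNat) hBinv0C).2.2 end_ heL val hv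
    · intro ss hss
      obtain ⟨ss', h1', h2', h3'⟩ := pvCut hctxC ss.length ss end_ (le_refl _) hss
      have hlen' : ss'.length ≤ (n - 1).toNat := by omega
      obtain ⟨val, hv, hvle⟩ :=
        pvBF_ub hctxC heptsC ((n - 1).toNat) dist0 hBinv0C ss' end_ h1' hlen'
      exact ⟨val, hv, by omega⟩
  have hBsp : pvIsSP arcs start end_ (pvDget (pvBFLoop arcsC (n - 1).toNat dist0) end_) := by
    constructor
    · intro val hv
      obtain ⟨ss, h1, h2⟩ := hBspC.1 val hv
      exact ⟨ss, pvLinked_mono hsubC h1, h2⟩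
    · intro ss hss
      exact hBspC.2 ss (hWalkAC ss start end_ hstartB hss)
  have hout : pvDget (pvDijkstra (pvGraphA edges (pvRestrictedSet restricted)) end_
      (pvFuelA n edges) (pvDset (List.replicate n.toNat none) start (some 0)) [(0, start)]) end_ =
      pvDget (pvBFLoop
        (pvArcsC (pvNRes edges restricted)
          (pvCompLoopB (pvNRes edges restricted)
            (2 * (pvNRes edges restricted).length + 2) [start]))
        (n - 1).toNat (pvDset (List.replicate n.toNat none) start (some 0))) end_ :=
    pvIsSP_unique hA hBsp
  show (match pvDget (pvDijkstra (pvGraphA edges (pvRestrictedSet restricted)) end_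
      (pvFuelA n edges) (pvDset (List.replicate n.toNat none) start (some 0))
      [(0, start)]) end_ with
    | some d => d
    | none => -1) =
    (match pvDget (pvBFLoop
        (pvArcsC (pvUsable edges (pvBanned restricted))
          (pvCompLoopB (pvUsable edges (pvBanned restricted))
            (2 * (pvUsable edges (pvBanned restricted)).length + 2) [start]))
        (n - 1).toNat (pvDset (List.replicate n.toNat none) start (some 0))) end_ with
    | some d => d
    | none => -1)
  rw [pvUsable_eq]
  rw [hout]
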